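-- pv_equiv track=rewrite | github.com/ldy9037/python-algorithm | algorithm-lv2/q29.py | solution
-- ===== SOURCE A (Python) =====
-- def move(arrow, x, y, limit):
--     row_limit, col_limit = limit
--     if arrow == "e": y = y + 1 if y < col_limit - 1 else 0
--     if arrow == "w": y = y - 1 if y > 0 else col_limit - 1
--     if arrow == "n": x = x - 1 if x > 0 else row_limit - 1
--     if arrow == "s": x = x + 1 if x < row_limit - 1 else 0
--
--     return (x, y)
--
-- def cycle(grid, visited, start):
--     arrow = ["n", "e", "s", "w"]
--     history = [start] # arrow, x, y 0,0,0이면 동쪽으로 가서 x,y에 도착했다는 뜻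
--
--     while len(history) <= 1 or history[0] != history[-1]:
--         p_arrow, row, col = history[-1]
--
--         arrow_index = p_arrow
--         if grid[row][col] == "L": arrow_index = p_arrow - 1 if p_arrow > 0 else 3
--         if grid[row][col] == "R": arrow_index = p_arrow + 1 if p_arrow < 3 else 0
--
--         n_row, n_col = move(arrow[arrow_index], row, col, (len(grid), len(grid[0])))
--
--         history.append((arrow_index, n_row, n_col))
--         visited[n_row][n_col][arrow_index] = True
--
--     return (visited, len(history) - 1)
--
-- def solution(grid):
--     answer = []
--
--     visited = []
--     for i in range(len(grid)):
--         visited.append([])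
--         for k in range(len(grid[0])):
--             visited[i].append([False] * 4)
--
--     for i in range(len(visited)):
--         for k in range(len(visited[i])):
--             for j in range(4):
--                 if not visited[i][k][j]:
--                     visited, distance = cycle(grid, visited, (j, i, k))
--                     answer.append(distance)
--
--     return sorted(answer)
-- ===== SOURCE B (Python) =====
-- def solution(grid):
--     rows = len(grid)
--     cols = len(grid[0]) if grid else 0
--     n = 4 * rows * cols
--     moves = ((-1, 0), (0, 1), (1, 0), (0, -1))  # n, e, s, w
--
--     def step(state):
--         d, r, c = state
--         ch = grid[r][c]
--         if ch == "L":
--             d = (d - 1) % 4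
--         elif ch == "R":
--             d = (d + 1) % 4
--         dr, dc = moves[d]
--         return (d, (r + dr) % rows, (c + dc) % cols)
--
--     # The successor map is a permutation of the 4*rows*cols states, so its
--     # functional graph is a disjoint union of cycles.  Label every state by the
--     # minimum state reachable from it (a canonical name for its cycle) and
--     # count how many states carry each label: the counts are the cycle lengths.
--     sizes = {}
--     for r in range(rows):
--         for c in range(cols):
--             for d in range(4):
--                 cur = (d, r, c)
--                 rep = cur
--                 for _ in range(n):
--                     cur = step(cur)
--                     rep = min(rep, cur)
--                 sizes[rep] = sizes.get(rep, 0) + 1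
--     return sorted(sizes.values())
-- ===== Notes on version B (the rewrite author's own statement) =====
-- stated objective: alternative
-- what changed: A walks each cycle from every still-unvisited state with a growing history list, a 3D visited array and an early-exit loop test; B instead canonically labels every state by the minimum state on its orbit (computed by a fixed 4*rows*cols-fold of the modular successor with a running min), tallies the labels in a dict, and returns the sorted tallies -- relying on the successor map being a permutation, so label classes are exactly the cycles and each tally is a cycle length.
import Mathlib
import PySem

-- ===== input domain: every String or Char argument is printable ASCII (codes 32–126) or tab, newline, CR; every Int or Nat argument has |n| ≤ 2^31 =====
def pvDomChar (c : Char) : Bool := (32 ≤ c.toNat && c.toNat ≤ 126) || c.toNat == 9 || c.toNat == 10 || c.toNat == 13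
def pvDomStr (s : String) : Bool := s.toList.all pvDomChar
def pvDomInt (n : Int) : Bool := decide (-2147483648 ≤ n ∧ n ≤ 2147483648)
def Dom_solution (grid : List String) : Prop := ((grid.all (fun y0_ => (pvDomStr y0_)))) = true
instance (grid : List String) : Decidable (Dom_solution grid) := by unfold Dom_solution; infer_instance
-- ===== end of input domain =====

-- B replaces A's cycle-walking (a growing history list, a 3D visited array, an early-exit loop
-- test) by canonical orbit labelling: every state is labelled with the minimum state on its orbit
-- (a fixed-length fold of the modular successor with a running min), the labels are tallied in a
-- dict, and the sorted tallies are returned (objective: alternative; not faster).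

-- ===== PORT A =====

-- grid[row][col] (none = IndexError); the cell access both Pythons perform
def pyCell (grid : List String) (row col : Int) : Option Char :=
  match PySem.List.pyGet? grid row with
  | some s => PySem.Str.pyGet? s col
  | none => none

def moveA (arrow : String) (x y : Int) (limit : Int × Int) : Int × Int :=
  let rowLimit := limit.1
  let colLimit := limit.2
  let y := if arrow = "e" then (if y < colLimit - 1 then y + 1 else 0) else y
  let y := if arrow = "w" then (if y > 0 then y - 1 else colLimit - 1) else y
  let x := if arrow = "n" then (if x > 0 then x - 1 else rowLimit - 1) else x
  let x := if arrow = "s" then (if x < rowLimit - 1 then x + 1 else 0) else x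
  (x, y)

-- visited[i][k][j] = True (Python raises on out-of-range assignment; excluded by Pre_)
def set3 (v : List (List (List Bool))) (i k j : Int) : List (List (List Bool)) :=
  let row := PySem.List.pyGetD v i []
  let cell := PySem.List.pyGetD row k []
  PySem.List.pySetD v i (PySem.List.pySetD row k (PySem.List.pySetD cell j true))

-- visited[i][k][j] (Python raises on out-of-range; indices are in range under Pre_)
def get3 (v : List (List (List Bool))) (i k j : Int) : Bool :=
  PySem.List.pyGetD (PySem.List.pyGetD (PySem.List.pyGetD v i []) k []) j false

-- the while loop of cycle(); fuel is only a totality guard (exhaustion returns the current count)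
def cycleA (grid : List String) (visited : List (List (List Bool)))
    (history : List (Int × Int × Int)) : Nat → (List (List (List Bool))) × Int
  | 0 => (visited, (history.length : Int) - 1)
  | fuel + 1 =>
    if history.length ≤ 1 ∨ PySem.List.pyGet? history 0 ≠ PySem.List.pyGet? history (-1) then
      match PySem.List.pyGet? history (-1) with
      | none => (visited, (history.length : Int) - 1)  -- unreachable: history is nonempty
      | some st =>
        let pArrow := st.1
        let row := st.2.1
        let col := st.2.2
        match pyCell grid row col with
        | none => (visited, (history.length : Int) - 1)  -- Python raises IndexError; excluded by Pre_
        | some ch =>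
          let a1 : Int := if ch = 'L' then (if pArrow > 0 then pArrow - 1 else 3) else pArrow
          let arrowIndex : Int := if ch = 'R' then (if pArrow < 3 then pArrow + 1 else 0) else a1
          match PySem.List.pyGet? (["n", "e", "s", "w"] : List String) arrowIndex with
          | none => (visited, (history.length : Int) - 1)  -- Python raises IndexError; unreachable from in-range starts
          | some arr =>
            let p := moveA arr row col ((grid.length : Int), ((PySem.List.pyGetD grid 0 "").length : Int))
            let history' := history ++ [(arrowIndex, p.1, p.2)]
            let visited' := set3 visited p.1 p.2 arrowIndex
            cycleA grid visited' history' fuel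
    else (visited, (history.length : Int) - 1)

def solution (grid : List String) : List Int :=
  -- fuel for cycle()'s while loop: ample inside Pre_ (the walk closes within 4*rows*cols steps)
  let fuel : Nat := 4 * grid.length * (PySem.List.pyGetD grid 0 "").length + 1
  let visited0 : List (List (List Bool)) :=
    (PySem.List.pyRange 0 (grid.length : Int) 1).foldl (fun v _ =>
      v ++ [(PySem.List.pyRange 0 ((PySem.List.pyGetD grid 0 "").length : Int) 1).foldl
              (fun row _ => row ++ [List.replicate 4 false]) []]) []
  let st :=
    (PySem.List.pyRange 0 (visited0.length : Int) 1).foldl (fun st i =>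
      (PySem.List.pyRange 0 ((PySem.List.pyGetD st.1 i []).length : Int) 1).foldl (fun st k =>
        (PySem.List.pyRange 0 4 1).foldl
          (fun (st : List (List (List Bool)) × List Int) j =>
            if ¬ get3 st.1 i k j then
              let r := cycleA grid st.1 [(j, i, k)] fuel
              (r.1, st.2 ++ [r.2])
            else st) st) st) (visited0, ([] : List Int))
  PySem.List.sorted st.2 (fun x => x) false

-- ===== PORT B =====

-- one application of Source B's step(): turn by the cell, then move with modular wraparound
def stepB (grid : List String) (rows cols : Int) (st : Int × Int × Int) : Int × Int × Int :=
  match pyCell grid st.2.1 st.2.2 with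
  | none => st  -- Python raises IndexError here; excluded by Pre_
  | some ch =>
    let d : Int :=
      if ch = 'L' then PySem.Int.mod (st.1 - 1) 4
      else if ch = 'R' then PySem.Int.mod (st.1 + 1) 4
      else st.1
    match PySem.List.pyGet? ([((-1 : Int), (0 : Int)), (0, 1), (1, 0), (0, -1)]) d with
    | none => st  -- unreachable: d ∈ [0, 4)
    | some dd => (d, PySem.Int.mod (st.2.1 + dd.1) rows, PySem.Int.mod (st.2.2 + dd.2) cols)

-- Python's min on int triples (lexicographic; the first argument on ties)
def pyle (a b : Int × Int × Int) : Bool :=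
  a.1 < b.1 || (a.1 == b.1 && (a.2.1 < b.2.1 || (a.2.1 == b.2.1 && a.2.2 ≤ b.2.2)))

def pymin (a b : Int × Int × Int) : Int × Int × Int := if pyle a b then a else b

def solution_alt (grid : List String) : List Int :=
  let rows : Int := grid.length
  let cols : Int := ((PySem.List.pyGetD grid 0 "").length : Int)  -- len(grid[0]) if grid else 0
  let n : Int := 4 * rows * cols
  let sizes :=
    (PySem.List.pyRange 0 rows 1).foldl (fun sizes r =>
      (PySem.List.pyRange 0 cols 1).foldl (fun sizes c =>
        (PySem.List.pyRange 0 4 1).foldl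
          (fun (sizes : PySem.Dict (Int × Int × Int) Int) d =>
            let start := (d, r, c)
            let rc := (PySem.List.pyRange 0 n 1).foldl
              (fun (p : (Int × Int × Int) × (Int × Int × Int)) _ =>
                let cur := stepB grid rows cols p.1
                (cur, pymin p.2 cur)) (start, start)
            PySem.Dict.insert sizes rc.2 (PySem.Dict.getD sizes rc.2 0 + 1)) sizes) sizes)
      (PySem.Dict.empty)
  PySem.List.sorted (PySem.Dict.values sizes) (fun x => x) false

-- ===== PRECONDITION & SPEC =====

-- Pre_ excludes exactly the ragged grids on which A raises IndexError: a row shorter than row 0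
-- (with column index < len(grid[0])) is always reached by the scan, and grid[row][col] raises.
def Pre_solution (grid : List String) : Prop :=
  ∀ s ∈ grid, (grid.head?.getD "").length ≤ s.length

instance (grid : List String) : Decidable (Pre_solution grid) := by
  unfold Pre_solution; infer_instance

def pvWitness_solution : List String := ["RL", "LS"]

def Spec_solution (grid : List String) (out : List Int) : Prop := out = solution_alt grid
instance (grid : List String) (out : List Int) : Decidable (Spec_solution grid out) := by
  unfold Spec_solution; infer_instance

-- ===== CLAIM (what is proved, stated in full; the proofs are below) =====
def Claim_equal_solution : Prop :=
  ∀ (grid : List String), Dom_solution grid → Pre_solution grid → Spec_solution grid (solution grid)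

-- ===== LEMMAS AND PROOFS =====


-- ---------- Part 0: A's visited-array walk equals a set-based walk (walkB) ----------
-- (proof-only definitions: the B program does not walk at all)

def InR (R C : Nat) (s : Int × Int × Int) : Prop :=
  0 ≤ s.1 ∧ s.1 < 4 ∧ 0 ≤ s.2.1 ∧ s.2.1 < (R : Int) ∧ 0 ≤ s.2.2 ∧ s.2.2 < (C : Int)

-- the while-True loop of the walk formulation; fuel only a totality guard
def walkB (grid : List String) (rows cols : Int) (start : Int × Int × Int) :
    (Int × Int × Int) → Int → PySem.Set (Int × Int × Int) → Nat → Int × PySem.Set (Int × Int × Int)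
  | _, n, seen, 0 => (n, seen)
  | cur, n, seen, fuel + 1 =>
    let cur' := stepB grid rows cols cur
    let seen' := PySem.Set.add seen cur'
    let n' := n + 1
    if cur' = start then (n', seen') else walkB grid rows cols start cur' n' seen' fuel

def VShape (v : List (List (List Bool))) (R C : Nat) : Prop :=
  v.length = R ∧ ∀ row ∈ v, row.length = C ∧ ∀ cell ∈ row, cell.length = 4

def VRel (v : List (List (List Bool))) (seen : PySem.Set (Int × Int × Int)) (R C : Nat) : Prop :=
  ∀ s : Int × Int × Int, InR R C s → (get3 v s.2.1 s.2.2 s.1 = PySem.Set.contains seen s)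

theorem pymod_dec (x n : Int) (h0 : 0 ≤ x) (h1 : x < n) :
    PySem.Int.mod (x - 1) n = if x > 0 then x - 1 else n - 1 := by
  rw [PySem.Int.mod_eq_emod_of_pos (by omega)]
  split_ifs with h
  · exact Int.emod_eq_of_lt (by omega) (by omega)
  · have hx : x = 0 := by omega
    subst hx
    rw [show (0:Int) - 1 = (n - 1) + n * (-1) by ring, Int.add_mul_emod_self_left]
    exact Int.emod_eq_of_lt (by omega) (by omega)

theorem pymod_inc (x n : Int) (h0 : 0 ≤ x) (h1 : x < n) :
    PySem.Int.mod (x + 1) n = if x < n - 1 then x + 1 else 0 := by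
  rw [PySem.Int.mod_eq_emod_of_pos (by omega)]
  split_ifs with h
  · exact Int.emod_eq_of_lt (by omega) (by omega)
  · have hx : x = n - 1 := by omega
    subst hx
    simp

theorem pymod_fix (x n : Int) (h0 : 0 ≤ x) (h1 : x < n) : PySem.Int.mod x n = x := by
  rw [PySem.Int.mod_eq_emod_of_pos (by omega)]
  exact Int.emod_eq_of_lt (by omega) (by omega)

theorem pymod_dec' (x n : Int) (h0 : 0 ≤ x) (h1 : x < n) :
    PySem.Int.mod (x + -1) n = if 0 < x then x - 1 else n - 1 := by
  rw [show x + -1 = x - 1 by ring, pymod_dec x n h0 h1]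

theorem len0_eq (grid : List String) : (PySem.List.pyGetD grid 0 "") = grid.head?.getD "" := by
  cases grid with
  | nil => rfl
  | cons a l => simp [PySem.List.pyGetD_zero_cons]

theorem pyCell_some (grid : List String) (hPre : Pre_solution grid) (r c : Int)
    (hr0 : 0 ≤ r) (hr1 : r < (grid.length : Int))
    (hc0 : 0 ≤ c) (hc1 : c < ((grid.head?.getD "").length : Int)) :
    ∃ ch, pyCell grid r c = some ch := by
  unfold pyCell
  rw [PySem.List.pyGet?_eq_some_getElem grid hr0 hr1]
  have hmem : grid[r.toNat] ∈ grid := List.getElem_mem _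
  have hlen : (grid.head?.getD "").length ≤ grid[r.toNat].length := hPre _ hmem
  show ∃ ch, PySem.Str.pyGet? grid[r.toNat] c = some ch
  rw [show PySem.Str.pyGet? grid[r.toNat] c = PySem.List.pyGet? grid[r.toNat].toList c from rfl]
  rw [PySem.List.pyGet?_eq_some_getElem grid[r.toNat].toList hc0 (by simp; omega)]
  exact ⟨_, rfl⟩

theorem stepB_inR (grid : List String) (R C : Nat) (s : Int × Int × Int)
    (hs : InR R C s) : InR R C (stepB grid (R : Int) (C : Int) s) := by
  obtain ⟨hd0, hd1, hr0, hr1, hc0, hc1⟩ := hs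
  unfold stepB
  cases hcell : pyCell grid s.2.1 s.2.2 with
  | none => exact ⟨hd0, hd1, hr0, hr1, hc0, hc1⟩
  | some ch =>
    simp only
    have hd'b : (0:Int) ≤ (if ch = 'L' then PySem.Int.mod (s.1 - 1) 4
          else if ch = 'R' then PySem.Int.mod (s.1 + 1) 4 else s.1) ∧
        (if ch = 'L' then PySem.Int.mod (s.1 - 1) 4
          else if ch = 'R' then PySem.Int.mod (s.1 + 1) 4 else s.1) < 4 := by
      split_ifs
      · rw [pymod_dec s.1 4 hd0 hd1]; constructor <;> (split_ifs <;> omega)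
      · rw [pymod_inc s.1 4 hd0 hd1]; constructor <;> (split_ifs <;> omega)
      · exact ⟨hd0, hd1⟩
    cases hg : PySem.List.pyGet?
        ([((-1 : Int), (0 : Int)), (0, 1), (1, 0), (0, -1)])
        (if ch = 'L' then PySem.Int.mod (s.1 - 1) 4
          else if ch = 'R' then PySem.Int.mod (s.1 + 1) 4 else s.1) with
    | none =>
      rw [PySem.List.pyGet?_eq_none_iff] at hg
      exact absurd (by constructor <;> simp <;> omega) hg
    | some dd =>
      refine ⟨hd'b.1, hd'b.2, ?_, ?_, ?_, ?_⟩
      · exact PySem.Int.mod_nonneg _ (by omega)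
      · exact PySem.Int.mod_lt _ (by omega)
      · exact PySem.Int.mod_nonneg _ (by omega)
      · exact PySem.Int.mod_lt _ (by omega)

theorem stepB_explicit (grid : List String) (R C : Nat)
    (hR : R = grid.length) (hC : C = (grid.head?.getD "").length)
    (d r c : Int) (ch : Char) (hch : pyCell grid r c = some ch)
    (hd0 : 0 ≤ d) (hd1 : d < 4) (hr0 : 0 ≤ r) (hr1 : r < (R : Int))
    (hc0 : 0 ≤ c) (hc1 : c < (C : Int)) :
    stepB grid (R : Int) (C : Int) (d, r, c) =
      (let a1 : Int := if ch = 'L' then (if d > 0 then d - 1 else 3) else d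
       let ai : Int := if ch = 'R' then (if d < 3 then d + 1 else 0) else a1
       let arr := (["n", "e", "s", "w"] : List String).getD ai.toNat ""
       let p := moveA arr r c ((grid.length : Int), ((PySem.List.pyGetD grid 0 "").length : Int))
       (ai, p.1, p.2)) := by
  subst hR hC
  rw [len0_eq]
  have h4 : ((4:Nat) : Int) = 4 := by norm_num
  interval_cases d <;> by_cases hL : ch = 'L' <;> by_cases hR' : ch = 'R' <;>
    simp_all [stepB, moveA, hch] <;>
    refine ⟨?_, ?_⟩ <;>
    first
      | exact pymod_fix _ _ (by omega) (by omega)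
      | exact pymod_inc _ _ (by omega) (by omega)
      | exact pymod_dec' _ _ (by omega) (by omega)

theorem cycleA_closed' (grid : List String) (visited : List (List (List Bool)))
    (history : List (Int × Int × Int)) (fuel : Nat)
    (h1 : 1 < history.length) (h2 : history.head? = history.getLast?) :
    cycleA grid visited history fuel = (visited, (history.length : Int) - 1) := by
  cases fuel with
  | zero => rfl
  | succ f =>
    rw [cycleA, if_neg]
    rw [PySem.List.pyGet?_zero, PySem.List.pyGet?_neg_one, ← List.head?_eq_getElem?]
    exact not_or.mpr ⟨by omega, not_not.mpr h2⟩

theorem cycleA_step' (grid : List String) (hPre : Pre_solution grid) (R C : Nat)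
    (hR : R = grid.length) (hC : C = (grid.head?.getD "").length)
    (visited : List (List (List Bool))) (history : List (Int × Int × Int))
    (fuel : Nat) (s : Int × Int × Int)
    (hlast : history.getLast? = some s) (hInR : InR R C s)
    (hopen : history.length ≤ 1 ∨ history.head? ≠ history.getLast?) :
    cycleA grid visited history (fuel + 1) =
      cycleA grid
        (set3 visited (stepB grid (R : Int) (C : Int) s).2.1
          (stepB grid (R : Int) (C : Int) s).2.2 (stepB grid (R : Int) (C : Int) s).1)
        (history ++ [stepB grid (R : Int) (C : Int) s]) fuel := by
  obtain ⟨d, r, c⟩ := s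
  obtain ⟨hd0, hd1, hr0, hr1, hc0, hc1⟩ := hInR
  obtain ⟨ch, hch⟩ := pyCell_some grid hPre r c hr0 (by rw [← hR]; exact hr1) hc0
    (by rw [← hC]; exact hc1)
  have hsb := stepB_explicit grid R C hR hC d r c ch hch hd0 hd1 hr0 hr1 hc0 hc1
  simp only at hsb
  have hai : 0 ≤ (if ch = 'R' then (if d < 3 then d + 1 else 0)
      else if ch = 'L' then (if d > 0 then d - 1 else 3) else d) ∧
      (if ch = 'R' then (if d < 3 then d + 1 else 0)
      else if ch = 'L' then (if d > 0 then d - 1 else 3) else d) < 4 := by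
    split_ifs <;> omega
  have hopen' : history.length ≤ 1 ∨
      PySem.List.pyGet? history 0 ≠ PySem.List.pyGet? history (-1) := by
    rw [PySem.List.pyGet?_zero, PySem.List.pyGet?_neg_one, ← List.head?_eq_getElem?]
    exact hopen
  have harr : PySem.List.pyGet? (["n", "e", "s", "w"] : List String)
      (if ch = 'R' then (if d < 3 then d + 1 else 0)
       else if ch = 'L' then (if d > 0 then d - 1 else 3) else d)
      = some ((["n", "e", "s", "w"] : List String).getD
          (if ch = 'R' then (if d < 3 then d + 1 else 0)
           else if ch = 'L' then (if d > 0 then d - 1 else 3) else d).toNat "") := by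
    rw [PySem.List.pyGet?_eq_some_getElem _ hai.1 (by exact_mod_cast hai.2)]
    rw [List.getD_eq_getElem]
  conv_lhs => rw [cycleA]
  rw [if_pos hopen', PySem.List.pyGet?_neg_one, hlast]
  dsimp only
  rw [hch]
  dsimp only
  rw [harr]
  dsimp only
  rw [hsb]

theorem getD_set {α : Type} (xs : List α) (n : Nat) (hn : n < xs.length) (v d : α) (m : Nat) :
    (xs.set n v).getD m d = if m = n then v else xs.getD m d := by
  rcases eq_or_ne m n with rfl | h
  · simp [List.getD_eq_getElem?_getD, hn]
  · simp [List.getD_eq_getElem?_getD, List.getElem?_set_ne (Ne.symm h), h]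

theorem set3_shape' (v : List (List (List Bool))) (R C : Nat) (hv : VShape v R C)
    (i k j : Nat) (hi : i < R) (hk : k < C) (hj : j < 4) :
    VShape (set3 v (i : Int) (k : Int) (j : Int)) R C := by
  obtain ⟨hlen, hrows⟩ := hv
  unfold set3
  simp only [PySem.List.pyGetD_natCast, PySem.List.pySetD_natCast]
  refine ⟨by simpa using hlen, ?_⟩
  intro row hrow
  rcases List.mem_or_eq_of_mem_set hrow with h | h
  · exact hrows row h
  · subst h
    have hivl : i < v.length := by omega
    have hvi : v.getD i [] ∈ v := by
      rw [List.getD_eq_getElem _ _ hivl]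
      exact List.getElem_mem hivl
    obtain ⟨hrl, hcells⟩ := hrows _ hvi
    refine ⟨by simpa using hrl, ?_⟩
    intro cell hcell
    rcases List.mem_or_eq_of_mem_set hcell with h | h
    · exact hcells cell h
    · subst h
      have hkl : k < (v.getD i []).length := by omega
      have hck : (v.getD i []).getD k [] ∈ v.getD i [] := by
        rw [List.getD_eq_getElem _ _ hkl]
        exact List.getElem_mem hkl
      simpa using hcells _ hck

theorem get3_set3' (v : List (List (List Bool))) (R C : Nat) (hv : VShape v R C)
    (i k j i' k' j' : Nat) (hi : i < R) (hk : k < C) (hj : j < 4)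
    (hi' : i' < R) (hk' : k' < C) (hj' : j' < 4) :
    get3 (set3 v (i : Int) (k : Int) (j : Int)) (i' : Int) (k' : Int) (j' : Int)
      = if ((j' : Int), (i' : Int), (k' : Int)) = ((j : Int), (i : Int), (k : Int)) then true
        else get3 v (i' : Int) (k' : Int) (j' : Int) := by
  obtain ⟨hlen, hrows⟩ := hv
  have hivl : i < v.length := by omega
  have hvi : v.getD i [] ∈ v := by
    rw [List.getD_eq_getElem _ _ hivl]
    exact List.getElem_mem hivl
  obtain ⟨hrl, hcells⟩ := hrows _ hvi
  have hkl : k < (v.getD i []).length := by omega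
  have hck : (v.getD i []).getD k [] ∈ v.getD i [] := by
    rw [List.getD_eq_getElem _ _ hkl]
    exact List.getElem_mem hkl
  have hcl : ((v.getD i []).getD k []).length = 4 := hcells _ hck
  unfold set3 get3
  simp only [PySem.List.pyGetD_natCast, PySem.List.pySetD_natCast]
  rw [getD_set v i (by omega)]
  by_cases hii : i' = i
  · subst hii
    rw [if_pos rfl, getD_set _ k (by omega)]
    by_cases hkk : k' = k
    · subst hkk
      rw [if_pos rfl, getD_set _ j (by omega)]
      by_cases hjj : j' = j
      · subst hjj
        simp
      · rw [if_neg hjj, if_neg (by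
          intro h
          injection h with h1 h2
          exact hjj (by exact_mod_cast h1))]
    · rw [if_neg hkk, if_neg (by
        intro h
        injection h with h1 h2
        injection h2 with h2a h2b
        exact hkk (by exact_mod_cast h2b))]
  · rw [if_neg hii, if_neg (by
      intro h
      injection h with h1 h2
      injection h2 with h2a h2b
      exact hii (by exact_mod_cast h2a))]

theorem vrel_update' (v : List (List (List Bool))) (seen : PySem.Set (Int × Int × Int))
    (R C : Nat) (hv : VShape v R C) (hrel : VRel v seen R C)
    (s : Int × Int × Int) (hs : InR R C s) :
    VRel (set3 v s.2.1 s.2.2 s.1) (PySem.Set.add seen s) R C := by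
  obtain ⟨sd, sr, sc⟩ := s
  have hd0 : 0 ≤ sd := hs.1
  have hd1 : sd < 4 := hs.2.1
  have hr0 : 0 ≤ sr := hs.2.2.1
  have hr1 : sr < (R : Int) := hs.2.2.2.1
  have hc0 : 0 ≤ sc := hs.2.2.2.2.1
  have hc1 : sc < (C : Int) := hs.2.2.2.2.2
  intro t ht
  obtain ⟨td, tr, tc⟩ := t
  have td0 : 0 ≤ td := ht.1
  have td1 : td < 4 := ht.2.1
  have tr0 : 0 ≤ tr := ht.2.2.1
  have tr1 : tr < (R : Int) := ht.2.2.2.1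
  have tc0 : 0 ≤ tc := ht.2.2.2.2.1
  have tc1 : tc < (C : Int) := ht.2.2.2.2.2
  obtain ⟨sdn, rfl⟩ : ∃ n : Nat, sd = (n : Int) := ⟨sd.toNat, by omega⟩
  obtain ⟨srn, rfl⟩ : ∃ n : Nat, sr = (n : Int) := ⟨sr.toNat, by omega⟩
  obtain ⟨scn, rfl⟩ : ∃ n : Nat, sc = (n : Int) := ⟨sc.toNat, by omega⟩
  obtain ⟨tdn, rfl⟩ : ∃ n : Nat, td = (n : Int) := ⟨td.toNat, by omega⟩
  obtain ⟨trn, rfl⟩ : ∃ n : Nat, tr = (n : Int) := ⟨tr.toNat, by omega⟩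
  obtain ⟨tcn, rfl⟩ : ∃ n : Nat, tc = (n : Int) := ⟨tc.toNat, by omega⟩
  show get3 (set3 v (srn : Int) (scn : Int) (sdn : Int)) (trn : Int) (tcn : Int) (tdn : Int) = _
  rw [get3_set3' v R C hv srn scn sdn trn tcn tdn (by omega) (by omega) (by omega)
    (by omega) (by omega) (by omega)]
  have hca : PySem.Set.contains
      (PySem.Set.add seen ((sdn : Int), (srn : Int), (scn : Int)))
      ((tdn : Int), (trn : Int), (tcn : Int))
      = (decide (((tdn : Int), (trn : Int), (tcn : Int)) = ((sdn : Int), (srn : Int), (scn : Int)))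
          || PySem.Set.contains seen ((tdn : Int), (trn : Int), (tcn : Int))) := by
    rw [Bool.eq_iff_iff]
    simp only [Bool.or_eq_true, decide_eq_true_eq, PySem.Set.contains_iff, PySem.Set.mem_add]
    tauto
  rw [hca]
  by_cases hts : ((tdn : Int), (trn : Int), (tcn : Int)) = ((sdn : Int), (srn : Int), (scn : Int))
  · rw [if_pos hts]
    simp [hts]
  · rw [if_neg hts]
    simp only [hts, decide_false, Bool.false_or]
    exact hrel ((tdn : Int), (trn : Int), (tcn : Int))
      ⟨by omega, by omega, by omega, by omega, by omega, by omega⟩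

theorem set3_shape_int (v : List (List (List Bool))) (R C : Nat) (hv : VShape v R C)
    (s : Int × Int × Int) (hs : InR R C s) : VShape (set3 v s.2.1 s.2.2 s.1) R C := by
  obtain ⟨sd, sr, sc⟩ := s
  have hd0 : 0 ≤ sd := hs.1
  have hd1 : sd < 4 := hs.2.1
  have hr0 : 0 ≤ sr := hs.2.2.1
  have hr1 : sr < (R : Int) := hs.2.2.2.1
  have hc0 : 0 ≤ sc := hs.2.2.2.2.1
  have hc1 : sc < (C : Int) := hs.2.2.2.2.2
  obtain ⟨sdn, rfl⟩ : ∃ n : Nat, sd = (n : Int) := ⟨sd.toNat, by omega⟩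
  obtain ⟨srn, rfl⟩ : ∃ n : Nat, sr = (n : Int) := ⟨sr.toNat, by omega⟩
  obtain ⟨scn, rfl⟩ : ∃ n : Nat, sc = (n : Int) := ⟨sc.toNat, by omega⟩
  exact set3_shape' v R C hv srn scn sdn (by omega) (by omega) (by omega)

theorem walk_eq' (grid : List String) (hPre : Pre_solution grid) (R C : Nat)
    (hR : R = grid.length) (hC : C = (grid.head?.getD "").length) :
    ∀ (fuel : Nat) (history : List (Int × Int × Int)) (start cur : Int × Int × Int)
      (visited : List (List (List Bool))) (seen : PySem.Set (Int × Int × Int)),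
      VShape visited R C → VRel visited seen R C →
      InR R C start → InR R C cur →
      history.head? = some start → history.getLast? = some cur →
      (history.length ≤ 1 ∨ start ≠ cur) →
      (cycleA grid visited history fuel).2
          = (walkB grid (R : Int) (C : Int) start cur ((history.length : Int) - 1) seen fuel).1
        ∧ VShape (cycleA grid visited history fuel).1 R C
        ∧ VRel (cycleA grid visited history fuel).1
            (walkB grid (R : Int) (C : Int) start cur ((history.length : Int) - 1) seen fuel).2 R C := by
  intro fuel
  induction fuel with
  | zero =>
    intro history start cur visited seen hshape hrel hstart hcur hhead hlast hopen
    exact ⟨rfl, hshape, hrel⟩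
  | succ f ih =>
    intro history start cur visited seen hshape hrel hstart hcur hhead hlast hopen
    have hne : history ≠ [] := by
      intro h
      rw [h] at hhead
      simp at hhead
    have hlen1 : 1 ≤ history.length := List.length_pos_iff.mpr hne
    have hopen2 : history.length ≤ 1 ∨ history.head? ≠ history.getLast? := by
      rcases hopen with h | h
      · exact Or.inl h
      · right
        rw [hhead, hlast]
        simp [h]
    rw [cycleA_step' grid hPre R C hR hC visited history f cur hlast hcur hopen2]
    have hs'InR : InR R C (stepB grid (R : Int) (C : Int) cur) := stepB_inR grid R C cur hcur
    have hshape' : VShape (set3 visited (stepB grid (R : Int) (C : Int) cur).2.1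
        (stepB grid (R : Int) (C : Int) cur).2.2 (stepB grid (R : Int) (C : Int) cur).1) R C :=
      set3_shape_int visited R C hshape _ hs'InR
    have hrel' : VRel (set3 visited (stepB grid (R : Int) (C : Int) cur).2.1
          (stepB grid (R : Int) (C : Int) cur).2.2 (stepB grid (R : Int) (C : Int) cur).1)
        (PySem.Set.add seen (stepB grid (R : Int) (C : Int) cur)) R C :=
      vrel_update' visited seen R C hshape hrel _ hs'InR
    rw [walkB]
    by_cases hcs : stepB grid (R : Int) (C : Int) cur = start
    · rw [if_pos hcs]
      rw [cycleA_closed' grid _ _ f (by simp; omega) (by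
        rw [List.getLast?_concat]
        rw [List.head?_append_of_ne_nil _ hne]
        rw [hhead, hcs])]
      exact ⟨by simp, hshape', hrel'⟩
    · rw [if_neg hcs]
      have hcnt : ((history.length : Int) - 1) + 1
          = (((history ++ [stepB grid (R : Int) (C : Int) cur]).length : Int) - 1) := by
        simp
      rw [hcnt]
      exact ih (history ++ [stepB grid (R : Int) (C : Int) cur]) start
        (stepB grid (R : Int) (C : Int) cur) _ _ hshape' hrel' hstart hs'InR
        (by rw [List.head?_append_of_ne_nil _ hne]; exact hhead)
        List.getLast?_concat
        (Or.inr (fun h => hcs h.symm))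

def Afun (grid : List String) (fuel : Nat) (i k : Int) :
    List (List (List Bool)) × List Int → Int → List (List (List Bool)) × List Int :=
  fun st j =>
    if ¬ get3 st.1 i k j then
      let r := cycleA grid st.1 [(j, i, k)] fuel
      (r.1, st.2 ++ [r.2])
    else st

def AfunK (grid : List String) (fuel : Nat) (i : Int) :
    List (List (List Bool)) × List Int → Int → List (List (List Bool)) × List Int :=
  fun st k => (PySem.List.pyRange 0 4 1).foldl (Afun grid fuel i k) st

def AfunI (grid : List String) (fuel : Nat) :
    List (List (List Bool)) × List Int → Int → List (List (List Bool)) × List Int :=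
  fun st i =>
    (PySem.List.pyRange 0 ((PySem.List.pyGetD st.1 i []).length : Int) 1).foldl
      (AfunK grid fuel i) st

def Bfun (grid : List String) (rows cols : Int) (fuel : Nat) (r c : Int) :
    PySem.Set (Int × Int × Int) × List Int → Int → PySem.Set (Int × Int × Int) × List Int :=
  fun st d =>
    let start := (d, r, c)
    if PySem.Set.contains st.1 start then st
    else
      let w := walkB grid rows cols start start 0 st.1 fuel
      (w.2, st.2 ++ [w.1])

def BfunC (grid : List String) (rows cols : Int) (fuel : Nat) (r : Int) :
    PySem.Set (Int × Int × Int) × List Int → Int → PySem.Set (Int × Int × Int) × List Int :=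
  fun st c => (PySem.List.pyRange 0 4 1).foldl (Bfun grid rows cols fuel r c) st

def BfunR (grid : List String) (rows cols : Int) (fuel : Nat) :
    PySem.Set (Int × Int × Int) × List Int → Int → PySem.Set (Int × Int × Int) × List Int :=
  fun st r => (PySem.List.pyRange 0 cols 1).foldl (BfunC grid rows cols fuel r) st

def vInit (grid : List String) : List (List (List Bool)) :=
  (PySem.List.pyRange 0 (grid.length : Int) 1).foldl (fun v _ =>
      v ++ [(PySem.List.pyRange 0 ((PySem.List.pyGetD grid 0 "").length : Int) 1).foldl
              (fun row _ => row ++ [List.replicate 4 false]) []]) []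

def aFuel (grid : List String) : Nat :=
  4 * grid.length * (PySem.List.pyGetD grid 0 "").length + 1

theorem hA_eq (grid : List String) :
    solution grid = PySem.List.sorted
      (((PySem.List.pyRange 0 ((vInit grid).length : Int) 1).foldl
          (AfunI grid (aFuel grid)) (vInit grid, [])).2) (fun x => x) false := rfl

theorem loopJ (grid : List String) (hPre : Pre_solution grid) (R C : Nat)
    (hR : R = grid.length) (hC : C = (grid.head?.getD "").length) (fuel : Nat)
    (i k : Int) (hi0 : 0 ≤ i) (hi1 : i < (R : Int)) (hk0 : 0 ≤ k) (hk1 : k < (C : Int)) :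
    ∀ (js : List Int) (v : List (List (List Bool))) (ans : List Int)
      (seen : PySem.Set (Int × Int × Int)),
      (∀ j ∈ js, 0 ≤ j ∧ j < 4) → VShape v R C → VRel v seen R C →
      (js.foldl (Afun grid fuel i k) (v, ans)).2
          = (js.foldl (Bfun grid (R : Int) (C : Int) fuel i k) (seen, ans)).2
        ∧ VShape (js.foldl (Afun grid fuel i k) (v, ans)).1 R C
        ∧ VRel (js.foldl (Afun grid fuel i k) (v, ans)).1
            (js.foldl (Bfun grid (R : Int) (C : Int) fuel i k) (seen, ans)).1 R C := by
  intro js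
  induction js with
  | nil => exact fun v ans seen _ hv hrel => ⟨rfl, hv, hrel⟩
  | cons j js ih =>
    intro v ans seen hjs hv hrel
    have hjb := hjs j (List.mem_cons_self)
    have hInRj : InR R C (j, i, k) := ⟨hjb.1, hjb.2, hi0, hi1, hk0, hk1⟩
    have hg : get3 v i k j = PySem.Set.contains seen (j, i, k) := hrel (j, i, k) hInRj
    simp only [List.foldl_cons]
    by_cases h : get3 v i k j = true
    · have hstepA : Afun grid fuel i k (v, ans) j = (v, ans) := by
        unfold Afun
        simp [h]
      have hmem : PySem.Set.contains seen (j, i, k) = true := by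
        rw [← hg]
        exact h
      have hstepB : Bfun grid (R : Int) (C : Int) fuel i k (seen, ans) j = (seen, ans) := by
        unfold Bfun
        simp [(PySem.Set.contains_iff _ _).mp hmem]
      rw [hstepA, hstepB]
      exact ih v ans seen (fun x hx => hjs x (List.mem_cons_of_mem _ hx)) hv hrel
    · have hw := walk_eq' grid hPre R C hR hC fuel [(j, i, k)] (j, i, k) (j, i, k) v seen
        hv hrel hInRj hInRj rfl rfl (Or.inl (by simp))
      have h0 : ((([(j, i, k)] : List (Int × Int × Int)).length : Int) - 1) = 0 := by simp
      rw [h0] at hw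
      have hstepA : Afun grid fuel i k (v, ans) j
          = ((cycleA grid v [(j, i, k)] fuel).1,
             ans ++ [(cycleA grid v [(j, i, k)] fuel).2]) := by
        unfold Afun
        simp [h]
      have hstepB : Bfun grid (R : Int) (C : Int) fuel i k (seen, ans) j
          = ((walkB grid (R : Int) (C : Int) (j, i, k) (j, i, k) 0 seen fuel).2,
             ans ++ [(walkB grid (R : Int) (C : Int) (j, i, k) (j, i, k) 0 seen fuel).1]) := by
        unfold Bfun
        have hmem : PySem.Set.contains seen (j, i, k) = false := by
          rw [← hg]
          simpa using h
        have hnm : (j, i, k) ∉ seen := by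
          intro hm
          rw [(PySem.Set.contains_iff _ _).mpr hm] at hmem
          cases hmem
        simp [hnm]
      rw [hstepA, hstepB, hw.1]
      exact ih _ _ _ (fun x hx => hjs x (List.mem_cons_of_mem _ hx)) hw.2.1 hw.2.2

theorem loopK (grid : List String) (hPre : Pre_solution grid) (R C : Nat)
    (hR : R = grid.length) (hC : C = (grid.head?.getD "").length) (fuel : Nat)
    (i : Int) (hi0 : 0 ≤ i) (hi1 : i < (R : Int)) :
    ∀ (ks : List Int) (v : List (List (List Bool))) (ans : List Int)
      (seen : PySem.Set (Int × Int × Int)),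
      (∀ k ∈ ks, 0 ≤ k ∧ k < (C : Int)) → VShape v R C → VRel v seen R C →
      (ks.foldl (AfunK grid fuel i) (v, ans)).2
          = (ks.foldl (BfunC grid (R : Int) (C : Int) fuel i) (seen, ans)).2
        ∧ VShape (ks.foldl (AfunK grid fuel i) (v, ans)).1 R C
        ∧ VRel (ks.foldl (AfunK grid fuel i) (v, ans)).1
            (ks.foldl (BfunC grid (R : Int) (C : Int) fuel i) (seen, ans)).1 R C := by
  intro ks
  induction ks with
  | nil => exact fun v ans seen _ hv hrel => ⟨rfl, hv, hrel⟩
  | cons k ks ih =>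
    intro v ans seen hks hv hrel
    have hkb := hks k (List.mem_cons_self)
    simp only [List.foldl_cons]
    have hj := loopJ grid hPre R C hR hC fuel i k hi0 hi1 hkb.1 hkb.2
      (PySem.List.pyRange 0 4 1) v ans seen
      (fun x hx => by
        rw [PySem.List.mem_pyRange_one] at hx
        exact hx) hv hrel
    unfold AfunK BfunC
    obtain ⟨h2, hsh, hre⟩ := hj
    have hpairA : (PySem.List.pyRange 0 4 1).foldl (Afun grid fuel i k) (v, ans)
        = (((PySem.List.pyRange 0 4 1).foldl (Afun grid fuel i k) (v, ans)).1,
           ((PySem.List.pyRange 0 4 1).foldl (Afun grid fuel i k) (v, ans)).2) := rfl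
    have hpairB : (PySem.List.pyRange 0 4 1).foldl
          (Bfun grid (R : Int) (C : Int) fuel i k) (seen, ans)
        = (((PySem.List.pyRange 0 4 1).foldl
              (Bfun grid (R : Int) (C : Int) fuel i k) (seen, ans)).1,
           ((PySem.List.pyRange 0 4 1).foldl
              (Bfun grid (R : Int) (C : Int) fuel i k) (seen, ans)).2) := rfl
    rw [hpairA, hpairB, h2]
    exact ih _ _ _ (fun x hx => hks x (List.mem_cons_of_mem _ hx)) hsh hre

theorem loopI (grid : List String) (hPre : Pre_solution grid) (R C : Nat)
    (hR : R = grid.length) (hC : C = (grid.head?.getD "").length) (fuel : Nat) :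
    ∀ (is : List Int) (v : List (List (List Bool))) (ans : List Int)
      (seen : PySem.Set (Int × Int × Int)),
      (∀ i ∈ is, 0 ≤ i ∧ i < (R : Int)) → VShape v R C → VRel v seen R C →
      (is.foldl (AfunI grid fuel) (v, ans)).2
          = (is.foldl (BfunR grid (R : Int) (C : Int) fuel) (seen, ans)).2
        ∧ VShape (is.foldl (AfunI grid fuel) (v, ans)).1 R C
        ∧ VRel (is.foldl (AfunI grid fuel) (v, ans)).1
            (is.foldl (BfunR grid (R : Int) (C : Int) fuel) (seen, ans)).1 R C := by
  intro is
  induction is with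
  | nil => exact fun v ans seen _ hv hrel => ⟨rfl, hv, hrel⟩
  | cons i is ih =>
    intro v ans seen his hv hrel
    have hib := his i (List.mem_cons_self)
    simp only [List.foldl_cons]
    have hbound : ((PySem.List.pyGetD v i []).length : Int) = (C : Int) := by
      have hiv : i.toNat < v.length := by
        have := hv.1
        omega
      rw [PySem.List.pyGetD_eq_getElem _ _ hib.1 (by omega)]
      have := (hv.2 _ (List.getElem_mem hiv)).1
      omega
    have hAstep : AfunI grid fuel (v, ans) i
        = (PySem.List.pyRange 0 (C : Int) 1).foldl (AfunK grid fuel i) (v, ans) := by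
      unfold AfunI
      rw [show (PySem.List.pyGetD (v, ans).1 i []) = PySem.List.pyGetD v i [] from rfl, hbound]
    rw [hAstep]
    unfold BfunR
    have hk := loopK grid hPre R C hR hC fuel i hib.1 hib.2
      (PySem.List.pyRange 0 (C : Int) 1) v ans seen
      (fun x hx => by
        rw [PySem.List.mem_pyRange_one] at hx
        exact hx) hv hrel
    obtain ⟨h2, hsh, hre⟩ := hk
    have hpairA : (PySem.List.pyRange 0 (C : Int) 1).foldl (AfunK grid fuel i) (v, ans)
        = (((PySem.List.pyRange 0 (C : Int) 1).foldl (AfunK grid fuel i) (v, ans)).1,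
           ((PySem.List.pyRange 0 (C : Int) 1).foldl (AfunK grid fuel i) (v, ans)).2) := rfl
    have hpairB : (PySem.List.pyRange 0 (C : Int) 1).foldl
          (BfunC grid (R : Int) (C : Int) fuel i) (seen, ans)
        = (((PySem.List.pyRange 0 (C : Int) 1).foldl
              (BfunC grid (R : Int) (C : Int) fuel i) (seen, ans)).1,
           ((PySem.List.pyRange 0 (C : Int) 1).foldl
              (BfunC grid (R : Int) (C : Int) fuel i) (seen, ans)).2) := rfl
    rw [hpairA, hpairB, h2]
    exact ih _ _ _ (fun x hx => his x (List.mem_cons_of_mem _ hx)) hsh hre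

theorem foldl_append_const {α β : Type} (l : List β) (x : α) :
    ∀ init : List α, l.foldl (fun v _ => v ++ [x]) init = init ++ List.replicate l.length x := by
  induction l with
  | nil => simp
  | cons a l ih =>
    intro init
    rw [List.foldl_cons, ih, List.length_cons, List.replicate_succ]
    simp

theorem vInit_eq (grid : List String) :
    vInit grid = List.replicate grid.length
      (List.replicate (PySem.List.pyGetD grid 0 "").length (List.replicate 4 false)) := by
  unfold vInit
  rw [foldl_append_const, foldl_append_const]
  simp [PySem.List.length_pyRange_one]

theorem vshape_init (grid : List String) :
    VShape (vInit grid) grid.length (PySem.List.pyGetD grid 0 "").length := by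
  rw [vInit_eq]
  refine ⟨by simp, ?_⟩
  intro row hrow
  rw [List.eq_of_mem_replicate hrow]
  refine ⟨by simp, ?_⟩
  intro cell hcell
  rw [List.eq_of_mem_replicate hcell]
  simp

theorem vrel_init (grid : List String) :
    VRel (vInit grid) PySem.Set.empty grid.length (PySem.List.pyGetD grid 0 "").length := by
  intro t ht
  obtain ⟨td, tr, tc⟩ := t
  have td0 : 0 ≤ td := ht.1
  have td1 : td < 4 := ht.2.1
  have tr0 : 0 ≤ tr := ht.2.2.1
  have tr1 : tr < (grid.length : Int) := ht.2.2.2.1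
  have tc0 : 0 ≤ tc := ht.2.2.2.2.1
  have tc1 : tc < ((PySem.List.pyGetD grid 0 "").length : Int) := ht.2.2.2.2.2
  obtain ⟨tdn, rfl⟩ : ∃ n : Nat, td = (n : Int) := ⟨td.toNat, by omega⟩
  obtain ⟨trn, rfl⟩ : ∃ n : Nat, tr = (n : Int) := ⟨tr.toNat, by omega⟩
  obtain ⟨tcn, rfl⟩ : ∃ n : Nat, tc = (n : Int) := ⟨tc.toNat, by omega⟩
  show get3 (vInit grid) (trn : Int) (tcn : Int) (tdn : Int) = _
  rw [vInit_eq]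
  unfold get3
  simp only [PySem.List.pyGetD_natCast]
  have hget : ∀ {α : Type} (n m : Nat) (x d : α), m < n → (List.replicate n x).getD m d = x := by
    intro α n m x d h
    rw [List.getD_eq_getElem _ _ (by simpa using h), List.getElem_replicate]
  rw [hget _ _ _ _ (by omega), hget _ _ _ _ (by omega), hget _ _ _ _ (by omega)]
  show false = PySem.Set.contains PySem.Set.empty ((tdn : Int), (trn : Int), (tcn : Int))
  rfl

-- A equals the set-based walk formulation
theorem solution_eq_walkfold (grid : List String) (hPre : Pre_solution grid) :
    solution grid = PySem.List.sorted
      (((PySem.List.pyRange 0 (grid.length : Int) 1).foldl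
          (BfunR grid (grid.length : Int) ((PySem.List.pyGetD grid 0 "").length : Int)
            (aFuel grid)) (PySem.Set.empty, [])).2) (fun x => x) false := by
  have hC : (PySem.List.pyGetD grid 0 "").length = (grid.head?.getD "").length := by
    rw [len0_eq]
  rw [hA_eq]
  have hvlen : ((vInit grid).length : Int) = (grid.length : Int) := by
    rw [vInit_eq]
    simp
  rw [hvlen]
  have hloop := loopI grid hPre grid.length (PySem.List.pyGetD grid 0 "").length rfl hC
    (aFuel grid) (PySem.List.pyRange 0 (grid.length : Int) 1) (vInit grid) [] PySem.Set.empty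
    (fun x hx => by
      rw [PySem.List.mem_pyRange_one] at hx
      exact hx)
    (vshape_init grid) (vrel_init grid)
  rw [hloop.1]



-- ---------- Part 1: pyle is a total order and pymin-folds compute a minimum ----------

theorem pyle_refl (a : Int × Int × Int) : pyle a a = true := by
  simp [pyle]

theorem pyle_total (a b : Int × Int × Int) : pyle a b = true ∨ pyle b a = true := by
  simp only [pyle, Bool.or_eq_true, Bool.and_eq_true, decide_eq_true_eq, beq_iff_eq]
  omega

theorem pyle_antisymm (a b : Int × Int × Int) (h1 : pyle a b = true) (h2 : pyle b a = true) :
    a = b := by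
  obtain ⟨a1, a2, a3⟩ := a
  obtain ⟨b1, b2, b3⟩ := b
  simp only [pyle, Bool.or_eq_true, Bool.and_eq_true, decide_eq_true_eq, beq_iff_eq] at h1 h2
  have : a1 = b1 ∧ a2 = b2 ∧ a3 = b3 := by omega
  simp [this.1, this.2.1, this.2.2]

theorem pyle_trans (a b c : Int × Int × Int) (h1 : pyle a b = true) (h2 : pyle b c = true) :
    pyle a c = true := by
  simp only [pyle, Bool.or_eq_true, Bool.and_eq_true, decide_eq_true_eq, beq_iff_eq] at h1 h2 ⊢
  omega

theorem pymin_le_left (a b : Int × Int × Int) : pyle (pymin a b) a = true := by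
  unfold pymin
  split_ifs with h
  · exact pyle_refl a
  · rcases pyle_total a b with h' | h'
    · exact absurd h' h
    · exact h'

theorem pymin_le_right (a b : Int × Int × Int) : pyle (pymin a b) b = true := by
  unfold pymin
  split_ifs with h
  · exact h
  · exact pyle_refl b

theorem foldl_pymin_mem : ∀ (l : List (Int × Int × Int)) (a : Int × Int × Int),
    l.foldl pymin a ∈ a :: l := by
  intro l
  induction l with
  | nil => intro a; exact List.mem_cons_self
  | cons b l ih =>
    intro a
    rw [List.foldl_cons]
    rcases List.mem_cons.mp (ih (pymin a b)) with h | h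
    · rw [h]
      unfold pymin
      split_ifs
      · exact List.mem_cons_self
      · exact List.mem_cons_of_mem _ List.mem_cons_self
    · exact List.mem_cons_of_mem _ (List.mem_cons_of_mem _ h)

theorem foldl_pymin_le : ∀ (l : List (Int × Int × Int)) (a : Int × Int × Int),
    ∀ x ∈ a :: l, pyle (l.foldl pymin a) x = true := by
  intro l
  induction l with
  | nil =>
    intro a x hx
    rcases List.mem_cons.mp hx with h | h
    · rw [h]; exact pyle_refl a
    · simp at h
  | cons b l ih =>
    intro a x hx
    rw [List.foldl_cons]
    have hha : pyle (l.foldl pymin (pymin a b)) (pymin a b) = true :=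
      ih (pymin a b) _ List.mem_cons_self
    rcases List.mem_cons.mp hx with h | hx
    · rw [h]; exact pyle_trans _ _ _ hha (pymin_le_left a b)
    · rcases List.mem_cons.mp hx with h | hx
      · rw [h]; exact pyle_trans _ _ _ hha (pymin_le_right a b)
      · exact ih (pymin a b) x (List.mem_cons_of_mem _ hx)

-- ---------- Part 2: orbit theory for an injective self-map of the in-range states ----------

def PVPerm (f : (Int × Int × Int) → (Int × Int × Int)) (R C : Nat) : Prop :=
  (∀ s, InR R C s → InR R C (f s)) ∧
  (∀ s t, InR R C s → InR R C t → f s = f t → s = t)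

theorem iterInR (f : (Int × Int × Int) → (Int × Int × Int)) (R C : Nat) (hf : PVPerm f R C)
    (s : Int × Int × Int) (hs : InR R C s) (k : Nat) : InR R C (f^[k] s) := by
  induction k with
  | zero => simpa
  | succ k ih =>
    rw [Function.iterate_succ_apply']
    exact hf.1 _ ih

theorem iter_cancel (f : (Int × Int × Int) → (Int × Int × Int)) (R C : Nat) (hf : PVPerm f R C) :
    ∀ (k : Nat) (x y : Int × Int × Int), InR R C x → InR R C y → f^[k] x = f^[k] y → x = y := by
  intro k
  induction k with
  | zero => intro x y _ _ h; simpa using h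
  | succ k ih =>
    intro x y hx hy h
    rw [Function.iterate_succ_apply, Function.iterate_succ_apply] at h
    exact hf.2 _ _ hx hy (ih (f x) (f y) (hf.1 _ hx) (hf.1 _ hy) h)

def encS (R C : Nat) (s : Int × Int × Int) : Nat :=
  (s.1.toNat * R + s.2.1.toNat) * C + s.2.2.toNat

theorem encS_lt (R C : Nat) (s : Int × Int × Int) (hs : InR R C s) :
    encS R C s < 4 * R * C := by
  obtain ⟨d, r, c⟩ := s
  obtain ⟨h1, h2, h3, h4, h5, h6⟩ := hs
  simp only at h1 h2 h3 h4 h5 h6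
  have hd : d.toNat < 4 := by omega
  have hr : r.toNat < R := by omega
  have hc : c.toNat < C := by omega
  show (d.toNat * R + r.toNat) * C + c.toNat < 4 * R * C
  have h7 : d.toNat * R + r.toNat + 1 ≤ 4 * R := by
    have : d.toNat * R ≤ 3 * R := Nat.mul_le_mul_right R (by omega)
    omega
  calc (d.toNat * R + r.toNat) * C + c.toNat
      < (d.toNat * R + r.toNat) * C + C := by omega
    _ = (d.toNat * R + r.toNat + 1) * C := by ring
    _ ≤ (4 * R) * C := Nat.mul_le_mul_right C h7
    _ = 4 * R * C := by ring

theorem unpack_base (a b c1 c2 C : Nat) (h1 : c1 < C) (h2 : c2 < C)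
    (h : a * C + c1 = b * C + c2) : a = b ∧ c1 = c2 := by
  have hC : 0 < C := by omega
  have ha : (a * C + c1) / C = a := by
    rw [Nat.mul_comm a C, Nat.mul_add_div hC, Nat.div_eq_of_lt h1]
    omega
  have hb : (b * C + c2) / C = b := by
    rw [Nat.mul_comm b C, Nat.mul_add_div hC, Nat.div_eq_of_lt h2]
    omega
  have hab : a = b := by rw [← ha, ← hb, h]
  subst hab
  exact ⟨rfl, by omega⟩

theorem encS_inj (R C : Nat) (s t : Int × Int × Int) (hs : InR R C s) (ht : InR R C t)
    (h : encS R C s = encS R C t) : s = t := by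
  obtain ⟨d1, r1, c1⟩ := s
  obtain ⟨d2, r2, c2⟩ := t
  obtain ⟨a1, a2, a3, a4, a5, a6⟩ := hs
  obtain ⟨b1, b2, b3, b4, b5, b6⟩ := ht
  simp only at a1 a2 a3 a4 a5 a6 b1 b2 b3 b4 b5 b6
  simp only [encS] at h
  have h1 := unpack_base _ _ _ _ _ (show c1.toNat < C by omega) (show c2.toNat < C by omega) h
  have h2 := unpack_base _ _ _ _ _ (show r1.toNat < R by omega) (show r2.toNat < R by omega) h1.1
  have : d1 = d2 ∧ r1 = r2 ∧ c1 = c2 := by omega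
  simp [this.1, this.2.1, this.2.2]

theorem exists_period (f : (Int × Int × Int) → (Int × Int × Int)) (R C : Nat)
    (hf : PVPerm f R C) (s : Int × Int × Int) (hs : InR R C s) :
    ∃ k, k < 4 * R * C + 1 ∧ 0 < k ∧ f^[k] s = s := by
  have hmaps : ∀ a ∈ Finset.range (4 * R * C + 1),
      encS R C (f^[a] s) ∈ Finset.range (4 * R * C) := by
    intro a _
    rw [Finset.mem_range]
    exact encS_lt R C _ (iterInR f R C hf s hs a)
  obtain ⟨i, hi, j, hj, hij, hEq⟩ :=
    Finset.exists_ne_map_eq_of_card_lt_of_maps_to (by simp) hmaps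
  rw [Finset.mem_range] at hi hj
  have hiter : f^[i] s = f^[j] s :=
    encS_inj R C _ _ (iterInR f R C hf s hs i) (iterInR f R C hf s hs j) hEq
  rcases Nat.lt_or_ge i j with hlt | hge
  · refine ⟨j - i, by omega, by omega, ?_⟩
    have : f^[i] s = f^[i] (f^[j - i] s) := by
      rw [← Function.iterate_add_apply, show i + (j - i) = j by omega, hiter]
    exact (iter_cancel f R C hf i s (f^[j - i] s) hs (iterInR f R C hf s hs _) this).symm
  · have hlt : j < i := by omega
    refine ⟨i - j, by omega, by omega, ?_⟩
    have : f^[j] s = f^[j] (f^[i - j] s) := by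
      rw [← Function.iterate_add_apply, show j + (i - j) = i by omega, hiter.symm]
    exact (iter_cancel f R C hf j s (f^[i - j] s) hs (iterInR f R C hf s hs _) this).symm

def perS (f : (Int × Int × Int) → (Int × Int × Int)) (N : Nat) (s : Int × Int × Int) : Nat :=
  if h : ∃ k, k < N + 1 ∧ 0 < k ∧ f^[k] s = s then Nat.find h else 0

theorem perS_spec (f : (Int × Int × Int) → (Int × Int × Int)) (N : Nat) (s : Int × Int × Int)
    (hex : ∃ k, k < N + 1 ∧ 0 < k ∧ f^[k] s = s) :
    0 < perS f N s ∧ perS f N s ≤ N ∧ f^[perS f N s] s = s := by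
  unfold perS
  rw [dif_pos hex]
  have h := Nat.find_spec hex
  exact ⟨h.2.1, by omega, h.2.2⟩

theorem perS_min (f : (Int × Int × Int) → (Int × Int × Int)) (N : Nat) (s : Int × Int × Int)
    (hex : ∃ k, k < N + 1 ∧ 0 < k ∧ f^[k] s = s) (m : Nat) (h0 : 0 < m)
    (hm : m < perS f N s) : f^[m] s ≠ s := by
  unfold perS at hm
  rw [dif_pos hex] at hm
  intro hc
  exact Nat.find_min hex hm ⟨by have := Nat.find_spec hex; omega, h0, hc⟩

theorem perS_le (f : (Int × Int × Int) → (Int × Int × Int)) (N : Nat) (s : Int × Int × Int)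
    (hex : ∃ k, k < N + 1 ∧ 0 < k ∧ f^[k] s = s) (k : Nat) (hk1 : k < N + 1) (hk2 : 0 < k)
    (hk3 : f^[k] s = s) : perS f N s ≤ k := by
  unfold perS
  rw [dif_pos hex]
  exact Nat.find_le ⟨hk1, hk2, hk3⟩

theorem iter_mod (f : (Int × Int × Int) → (Int × Int × Int)) (N : Nat) (s : Int × Int × Int)
    (hex : ∃ k, k < N + 1 ∧ 0 < k ∧ f^[k] s = s) :
    ∀ k, f^[k] s = f^[k % perS f N s] s := by
  intro k
  induction k using Nat.strong_induction_on with
  | _ k ih =>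
    have hp := perS_spec f N s hex
    by_cases h : k < perS f N s
    · rw [Nat.mod_eq_of_lt h]
    · rw [show k = (k - perS f N s) + perS f N s by omega, Function.iterate_add_apply,
        hp.2.2, ih (k - perS f N s) (by omega),
        Nat.add_mod_right]
      
def OrbS (f : (Int × Int × Int) → (Int × Int × Int)) (t u : Int × Int × Int) : Prop :=
  ∃ k : Nat, f^[k] t = u

theorem OrbS_refl (f : (Int × Int × Int) → (Int × Int × Int)) (t : Int × Int × Int) :
    OrbS f t t := ⟨0, rfl⟩

theorem OrbS_trans (f : (Int × Int × Int) → (Int × Int × Int)) (t u v : Int × Int × Int)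
    (h1 : OrbS f t u) (h2 : OrbS f u v) : OrbS f t v := by
  obtain ⟨k1, hk1⟩ := h1
  obtain ⟨k2, hk2⟩ := h2
  exact ⟨k2 + k1, by rw [Function.iterate_add_apply, hk1, hk2]⟩

theorem OrbS_inR (f : (Int × Int × Int) → (Int × Int × Int)) (R C : Nat) (hf : PVPerm f R C)
    (t u : Int × Int × Int) (ht : InR R C t) (h : OrbS f t u) : InR R C u := by
  obtain ⟨k, hk⟩ := h
  rw [← hk]
  exact iterInR f R C hf t ht k

theorem OrbS_symm (f : (Int × Int × Int) → (Int × Int × Int)) (R C N : Nat) (hf : PVPerm f R C)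
    (hexAll : ∀ s, InR R C s → ∃ k, k < N + 1 ∧ 0 < k ∧ f^[k] s = s)
    (t u : Int × Int × Int) (ht : InR R C t) (h : OrbS f t u) : OrbS f u t := by
  obtain ⟨k, hk⟩ := h
  have hex := hexAll t ht
  have hp := perS_spec f N t hex
  set p := perS f N t with hpdef
  refine ⟨p - k % p, ?_⟩
  rw [← hk, ← Function.iterate_add_apply]
  have hdm := Nat.div_add_mod k p
  have hmlt : k % p < p := Nat.mod_lt _ hp.1
  have hexp : (p - k % p) + k = p * (k / p + 1) := by
    have : p * (k / p + 1) = p * (k / p) + p := by ring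
    omega
  rw [hexp, Function.iterate_mul]
  exact Function.iterate_fixed hp.2.2 _

def orbL (f : (Int × Int × Int) → (Int × Int × Int)) (N : Nat) (t : Int × Int × Int) :
    List (Int × Int × Int) := (List.range (perS f N t)).map (fun k => f^[k] t)

theorem length_orbL (f : (Int × Int × Int) → (Int × Int × Int)) (N : Nat)
    (t : Int × Int × Int) : (orbL f N t).length = perS f N t := by
  simp [orbL]

theorem mem_orbL (f : (Int × Int × Int) → (Int × Int × Int)) (N : Nat)
    (t u : Int × Int × Int) (hex : ∃ k, k < N + 1 ∧ 0 < k ∧ f^[k] t = t) :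
    u ∈ orbL f N t ↔ OrbS f t u := by
  unfold orbL
  rw [List.mem_map]
  constructor
  · rintro ⟨k, _, hk⟩
    exact ⟨k, hk⟩
  · rintro ⟨k, hk⟩
    have hp := perS_spec f N t hex
    exact ⟨k % perS f N t, by rw [List.mem_range]; exact Nat.mod_lt _ hp.1,
      by rw [← iter_mod f N t hex k]; exact hk⟩

theorem nodup_orbL (f : (Int × Int × Int) → (Int × Int × Int)) (R C N : Nat) (hf : PVPerm f R C)
    (t : Int × Int × Int) (ht : InR R C t)
    (hex : ∃ k, k < N + 1 ∧ 0 < k ∧ f^[k] t = t) : (orbL f N t).Nodup := by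
  unfold orbL
  rw [List.nodup_map_iff_inj_on List.nodup_range]
  intro x hx y hy hxy
  rw [List.mem_range] at hx hy
  by_contra hne
  rcases Nat.lt_or_ge x y with hlt | hge
  · have : t = f^[y - x] t := by
      apply iter_cancel f R C hf x t (f^[y - x] t) ht (iterInR f R C hf t ht _)
      rw [← Function.iterate_add_apply, show x + (y - x) = y by omega, hxy]
    exact perS_min f N t hex (y - x) (by omega) (by omega) this.symm
  · have hlt : y < x := by omega
    have : t = f^[x - y] t := by
      apply iter_cancel f R C hf y t (f^[x - y] t) ht (iterInR f R C hf t ht _)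
      rw [← Function.iterate_add_apply, show y + (x - y) = x by omega, hxy.symm]
    exact perS_min f N t hex (x - y) (by omega) (by omega) this.symm

-- ---------- Part 3: the canonical label keyS (minimum of the orbit) ----------

def keyS (f : (Int × Int × Int) → (Int × Int × Int)) (N : Nat) (s : Int × Int × Int) :
    Int × Int × Int := ((List.range N).map (fun k => f^[k + 1] s)).foldl pymin s

theorem keyS_orb (f : (Int × Int × Int) → (Int × Int × Int)) (N : Nat)
    (s : Int × Int × Int) : OrbS f s (keyS f N s) := by
  have h := foldl_pymin_mem ((List.range N).map (fun k => f^[k + 1] s)) s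
  rw [show ((List.range N).map (fun k => f^[k + 1] s)).foldl pymin s = keyS f N s from rfl] at h
  rcases List.mem_cons.mp h with h | h
  · rw [h]; exact OrbS_refl f s
  · rw [List.mem_map] at h
    obtain ⟨k, _, hk⟩ := h
    exact ⟨k + 1, hk⟩

theorem keyS_min (f : (Int × Int × Int) → (Int × Int × Int)) (N : Nat)
    (s u : Int × Int × Int) (hex : ∃ k, k < N + 1 ∧ 0 < k ∧ f^[k] s = s)
    (h : OrbS f s u) : pyle (keyS f N s) u = true := by
  obtain ⟨k, hk⟩ := h
  have hp := perS_spec f N s hex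
  have hk' : f^[k % perS f N s] s = u := by rw [← iter_mod f N s hex k]; exact hk
  set m := k % perS f N s with hm
  have hmb : m < perS f N s := Nat.mod_lt _ hp.1
  rcases Nat.eq_zero_or_pos m with h0 | h0
  · rw [h0] at hk'
    apply foldl_pymin_le
    rw [← hk']
    exact List.mem_cons_self
  · apply foldl_pymin_le
    apply List.mem_cons_of_mem
    rw [List.mem_map]
    exact ⟨m - 1, by rw [List.mem_range]; omega, by rw [show m - 1 + 1 = m by omega]; exact hk'⟩

theorem keyS_congr (f : (Int × Int × Int) → (Int × Int × Int)) (R C N : Nat) (hf : PVPerm f R C)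
    (hexAll : ∀ s, InR R C s → ∃ k, k < N + 1 ∧ 0 < k ∧ f^[k] s = s)
    (t u : Int × Int × Int) (ht : InR R C t) (h : OrbS f t u) : keyS f N t = keyS f N u := by
  have hu : InR R C u := OrbS_inR f R C hf t u ht h
  have hut : OrbS f u t := OrbS_symm f R C N hf hexAll t u ht h
  apply pyle_antisymm
  · exact keyS_min f N t (keyS f N u) (hexAll t ht)
      (OrbS_trans f t u _ h (keyS_orb f N u))
  · exact keyS_min f N u (keyS f N t) (hexAll u hu)
      (OrbS_trans f u t _ hut (keyS_orb f N t))

theorem keyS_eq_orb (f : (Int × Int × Int) → (Int × Int × Int)) (R C N : Nat) (hf : PVPerm f R C)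
    (hexAll : ∀ s, InR R C s → ∃ k, k < N + 1 ∧ 0 < k ∧ f^[k] s = s)
    (s t : Int × Int × Int) (hs : InR R C s) (ht : InR R C t)
    (h : keyS f N s = keyS f N t) : OrbS f s t := by
  have h1 : OrbS f s (keyS f N s) := keyS_orb f N s
  have h2 : OrbS f t (keyS f N t) := keyS_orb f N t
  rw [← h] at h2
  exact OrbS_trans f s (keyS f N s) t h1 (OrbS_symm f R C N hf hexAll t _ ht h2)



-- ---------- Part 4: the successor map is a permutation of the in-range states ----------

theorem stepB_injOn (grid : List String) (hPre : Pre_solution grid) (R C : Nat)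
    (hR : R = grid.length) (hC : C = (grid.head?.getD "").length)
    (s t : Int × Int × Int) (hs : InR R C s) (ht : InR R C t)
    (h : stepB grid (R : Int) (C : Int) s = stepB grid (R : Int) (C : Int) t) : s = t := by
  obtain ⟨d1, r1, c1⟩ := s
  obtain ⟨d2, r2, c2⟩ := t
  obtain ⟨a1, a2, a3, a4, a5, a6⟩ := hs
  obtain ⟨b1, b2, b3, b4, b5, b6⟩ := ht
  simp only at a1 a2 a3 a4 a5 a6 b1 b2 b3 b4 b5 b6
  obtain ⟨ch1, hch1⟩ := pyCell_some grid hPre r1 c1 a3 (by rw [← hR]; exact a4) a5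
    (by rw [← hC]; exact a6)
  obtain ⟨ch2, hch2⟩ := pyCell_some grid hPre r2 c2 b3 (by rw [← hR]; exact b4) b5
    (by rw [← hC]; exact b6)
  rw [stepB_explicit grid R C hR hC d1 r1 c1 ch1 hch1 a1 a2 a3 a4 a5 a6,
    stepB_explicit grid R C hR hC d2 r2 c2 ch2 hch2 b1 b2 b3 b4 b5 b6] at h
  dsimp only at h
  rw [Prod.mk.injEq, Prod.mk.injEq] at h
  obtain ⟨hai, hmr, hmc⟩ := h
  have hb1 : 0 ≤ (if ch1 = 'R' then (if d1 < 3 then d1 + 1 else 0)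
        else if ch1 = 'L' then (if d1 > 0 then d1 - 1 else 3) else d1)
      ∧ (if ch1 = 'R' then (if d1 < 3 then d1 + 1 else 0)
        else if ch1 = 'L' then (if d1 > 0 then d1 - 1 else 3) else d1) < 4 := by
    split_ifs <;> omega
  obtain ⟨k, hk, hk4⟩ : ∃ k : Nat,
      (if ch1 = 'R' then (if d1 < 3 then d1 + 1 else 0)
        else if ch1 = 'L' then (if d1 > 0 then d1 - 1 else 3) else d1) = (k : Int) ∧ k < 4 :=
    ⟨(if ch1 = 'R' then (if d1 < 3 then d1 + 1 else 0)
        else if ch1 = 'L' then (if d1 > 0 then d1 - 1 else 3) else d1).toNat,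
     by omega, by omega⟩
  rw [← hai, hk] at hmr hmc
  rw [len0_eq grid, ← hC, ← hR] at hmr hmc
  have hrc : r1 = r2 ∧ c1 = c2 := by
    interval_cases k <;>
      simp [moveA] at hmr hmc <;>
      first
        | (split_ifs at hmr hmc <;> exact ⟨by omega, by omega⟩)
        | exact ⟨by omega, by omega⟩
  obtain ⟨hr12, hc12⟩ := hrc
  subst hr12
  subst hc12
  rw [hch1] at hch2
  injection hch2 with hch
  subst hch
  have hd12 : d1 = d2 := by
    by_cases hRc : ch1 = 'R'
    · rw [if_pos hRc, if_pos hRc] at hai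
      split_ifs at hai <;> omega
    · rw [if_neg hRc, if_neg hRc] at hai
      by_cases hLc : ch1 = 'L'
      · rw [if_pos hLc, if_pos hLc] at hai
        split_ifs at hai <;> omega
      · rw [if_neg hLc, if_neg hLc] at hai
        omega
  rw [hd12]

theorem stepB_perm (grid : List String) (hPre : Pre_solution grid) (R C : Nat)
    (hR : R = grid.length) (hC : C = (grid.head?.getD "").length) :
    PVPerm (stepB grid (R : Int) (C : Int)) R C :=
  ⟨fun s hs => stepB_inR grid R C s hs,
   fun s t hs ht h => stepB_injOn grid hPre R C hR hC s t hs ht h⟩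

theorem stepB_hexAll (grid : List String) (hPre : Pre_solution grid) (R C : Nat)
    (hR : R = grid.length) (hC : C = (grid.head?.getD "").length) :
    ∀ s, InR R C s →
      ∃ k, k < 4 * R * C + 1 ∧ 0 < k ∧ (stepB grid (R : Int) (C : Int))^[k] s = s :=
  fun s hs => exists_period _ R C (stepB_perm grid hPre R C hR hC) s hs



-- ---------- Part 5: the walk from an in-range start counts the period and adds the orbit ----------

theorem walkB_run (grid : List String) (R C N : Nat) (start : Int × Int × Int)
    (hex : ∃ k, k < N + 1 ∧ 0 < k ∧ (stepB grid (R : Int) (C : Int))^[k] start = start) :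
    ∀ (fuel m : Nat) (seen : PySem.Set (Int × Int × Int)),
      m < perS (stepB grid (R : Int) (C : Int)) N start →
      perS (stepB grid (R : Int) (C : Int)) N start ≤ m + fuel →
      (walkB grid (R : Int) (C : Int) start ((stepB grid (R : Int) (C : Int))^[m] start)
          (m : Int) seen fuel).1
        = (perS (stepB grid (R : Int) (C : Int)) N start : Int) ∧
      ∀ x, PySem.Set.contains (walkB grid (R : Int) (C : Int) start
              ((stepB grid (R : Int) (C : Int))^[m] start) (m : Int) seen fuel).2 x = true ↔
        (PySem.Set.contains seen x = true ∨
         ∃ k, m < k ∧ k ≤ perS (stepB grid (R : Int) (C : Int)) N start ∧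
           (stepB grid (R : Int) (C : Int))^[k] start = x) := by
  intro fuel
  induction fuel with
  | zero =>
    intro m seen h1 h2
    omega
  | succ f ih =>
    intro m seen h1 h2
    have hp := perS_spec _ N start hex
    have hstep : stepB grid (R : Int) (C : Int) ((stepB grid (R : Int) (C : Int))^[m] start)
        = (stepB grid (R : Int) (C : Int))^[m + 1] start :=
      (Function.iterate_succ_apply' _ m start).symm
    rw [walkB]
    simp only [hstep]
    by_cases hts : (stepB grid (R : Int) (C : Int))^[m + 1] start = start
    · rw [if_pos hts]
      have hle : perS (stepB grid (R : Int) (C : Int)) N start ≤ m + 1 :=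
        perS_le _ N start hex (m + 1) (by omega) (by omega) hts
      have hper : perS (stepB grid (R : Int) (C : Int)) N start = m + 1 := by omega
      constructor
      · show (m : Int) + 1 = _
        rw [hper]
        push_cast
        ring
      · intro x
        show PySem.Set.contains
            (PySem.Set.add seen ((stepB grid (R : Int) (C : Int))^[m + 1] start)) x = true ↔ _
        rw [PySem.Set.contains_iff, PySem.Set.mem_add]
        constructor
        · rintro (hx | hx)
          · exact Or.inl ((PySem.Set.contains_iff seen x).mpr hx)
          · exact Or.inr ⟨m + 1, by omega, by omega, hx.symm⟩
        · rintro (hx | ⟨k, hk1, hk2, hk3⟩)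
          · exact Or.inl ((PySem.Set.contains_iff seen x).mp hx)
          · have hkm : k = m + 1 := by omega
            rw [hkm] at hk3
            exact Or.inr hk3.symm
    · rw [if_neg hts]
      have h1' : m + 1 < perS (stepB grid (R : Int) (C : Int)) N start := by
        rcases Nat.lt_or_ge (m + 1) (perS (stepB grid (R : Int) (C : Int)) N start) with h | h
        · exact h
        · have : perS (stepB grid (R : Int) (C : Int)) N start = m + 1 := by omega
          rw [← this] at hts
          exact absurd hp.2.2 hts
      have hcast : (m : Int) + 1 = ((m + 1 : Nat) : Int) := by push_cast; ring
      rw [hcast]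
      obtain ⟨ih1, ih2⟩ := ih (m + 1) (PySem.Set.add seen ((stepB grid (R : Int) (C : Int))^[m + 1] start))
        h1' (by omega)
      refine ⟨ih1, ?_⟩
      intro x
      rw [ih2 x]
      rw [PySem.Set.contains_iff _ x, PySem.Set.mem_add]
      constructor
      · rintro ((hx | hx) | ⟨k, hk1, hk2, hk3⟩)
        · exact Or.inl ((PySem.Set.contains_iff seen x).mpr hx)
        · exact Or.inr ⟨m + 1, by omega, by omega, hx.symm⟩
        · exact Or.inr ⟨k, by omega, hk2, hk3⟩
      · rintro (hx | ⟨k, hk1, hk2, hk3⟩)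
        · exact Or.inl (Or.inl ((PySem.Set.contains_iff seen x).mp hx))
        · rcases Nat.lt_or_ge (m + 1) k with h | h
          · exact Or.inr ⟨k, by omega, hk2, hk3⟩
          · have hkm : k = m + 1 := by omega
            rw [hkm] at hk3
            exact Or.inl (Or.inr hk3.symm)

-- ---------- Part 6: B's inner fold computes the iterate and the orbit minimum ----------

theorem fold_iter_min (grid : List String) (rows cols : Int) (start : Int × Int × Int) :
    ∀ n : Nat,
      (List.range n).foldl
          (fun (p : (Int × Int × Int) × (Int × Int × Int)) _ =>
            (stepB grid rows cols p.1, pymin p.2 (stepB grid rows cols p.1)))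
          (start, start)
        = ((stepB grid rows cols)^[n] start,
           ((List.range n).map (fun k => (stepB grid rows cols)^[k + 1] start)).foldl pymin start) := by
  intro n
  induction n with
  | zero => simp
  | succ n ih =>
    rw [List.range_succ, List.foldl_append, List.map_append, List.foldl_append, ih]
    simp only [List.foldl_cons, List.foldl_nil, List.map_cons, List.map_nil]
    rw [Function.iterate_succ_apply']



-- ---------- Part 7: the enumeration of all states ----------

def Elist (R C : Nat) : List (Int × Int × Int) :=
  (PySem.List.pyRange 0 (R : Int) 1).flatMap (fun r =>
    (PySem.List.pyRange 0 (C : Int) 1).flatMap (fun c =>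
      (PySem.List.pyRange 0 4 1).map (fun d => (d, r, c))))

theorem mem_Elist (R C : Nat) (s : Int × Int × Int) : s ∈ Elist R C ↔ InR R C s := by
  obtain ⟨d, r, c⟩ := s
  simp only [Elist, List.mem_flatMap, List.mem_map, PySem.List.mem_pyRange_one]
  constructor
  · rintro ⟨r', hr', c', hc', d', hd', heq⟩
    rw [Prod.mk.injEq, Prod.mk.injEq] at heq
    obtain ⟨h1, h2, h3⟩ := heq
    subst h1; subst h2; subst h3
    exact ⟨hd'.1, hd'.2, hr'.1, hr'.2, hc'.1, hc'.2⟩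
  · rintro ⟨h1, h2, h3, h4, h5, h6⟩
    exact ⟨r, ⟨h3, h4⟩, c, ⟨h5, h6⟩, d, ⟨h1, h2⟩, rfl⟩

theorem nodup_pyRange_zero (n : Nat) : (PySem.List.pyRange 0 (n : Int) 1).Nodup := by
  rw [PySem.List.pyRange_zero_natCast]
  exact List.nodup_range.map (fun a b h => by exact_mod_cast h)

theorem nodup_Elist (R C : Nat) : (Elist R C).Nodup := by
  rw [Elist, List.nodup_flatMap]
  refine ⟨?_, ?_⟩
  · intro r _
    rw [List.nodup_flatMap]
    refine ⟨?_, ?_⟩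
    · intro c _
      refine List.Nodup.map ?_ (by decide)
      intro x y hxy
      rw [Prod.mk.injEq] at hxy
      exact hxy.1
    · refine (nodup_pyRange_zero C).imp ?_
      intro c1 c2 hne x hx1 hx2
      rw [List.mem_map] at hx1 hx2
      obtain ⟨d1, _, h1⟩ := hx1
      obtain ⟨d2, _, h2⟩ := hx2
      apply hne
      rw [← h1] at h2
      rw [Prod.mk.injEq, Prod.mk.injEq] at h2
      exact h2.2.2.symm
  · refine (nodup_pyRange_zero R).imp ?_
    intro r1 r2 hne x hx1 hx2
    rw [List.mem_flatMap] at hx1 hx2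
    obtain ⟨c1, _, hm1⟩ := hx1
    obtain ⟨c2, _, hm2⟩ := hx2
    rw [List.mem_map] at hm1 hm2
    obtain ⟨d1, _, h1⟩ := hm1
    obtain ⟨d2, _, h2⟩ := hm2
    apply hne
    rw [← h1] at h2
    rw [Prod.mk.injEq, Prod.mk.injEq] at h2
    exact h2.2.1.symm

theorem countP_Elist (f : (Int × Int × Int) → (Int × Int × Int)) (R C N : Nat)
    (hf : PVPerm f R C)
    (hexAll : ∀ s, InR R C s → ∃ k, k < N + 1 ∧ 0 < k ∧ f^[k] s = s)
    (t : Int × Int × Int) (ht : InR R C t) :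
    (Elist R C).countP (fun u => decide (u ∈ orbL f N t)) = perS f N t := by
  rw [List.countP_eq_length_filter, ← length_orbL f N t]
  apply List.Perm.length_eq
  apply (List.perm_ext_iff_of_nodup (List.Nodup.filter _ (nodup_Elist R C))
    (nodup_orbL f R C N hf t ht (hexAll t ht))).mpr
  intro x
  rw [List.mem_filter, mem_Elist, decide_eq_true_eq]
  constructor
  · exact fun h => h.2
  · intro h
    refine ⟨?_, h⟩
    rw [mem_orbL f N t x (hexAll t ht)] at h
    exact OrbS_inR f R C hf t x ht h

-- ---------- Part 8: lockstep over the enumeration ----------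

def astepF (grid : List String) (R C : Nat) (fuel : Nat) :
    (PySem.Set (Int × Int × Int) × List Int) → (Int × Int × Int) →
    (PySem.Set (Int × Int × Int) × List Int) :=
  fun st s =>
    if PySem.Set.contains st.1 s then st
    else
      let w := walkB grid (R : Int) (C : Int) s s 0 st.1 fuel
      (w.2, st.2 ++ [w.1])

def dstepF (grid : List String) (R C N : Nat) :
    PySem.Dict (Int × Int × Int) Int → (Int × Int × Int) → PySem.Dict (Int × Int × Int) Int :=
  fun sizes s =>
    PySem.Dict.insert sizes (keyS (stepB grid (R : Int) (C : Int)) N s)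
      (PySem.Dict.getD sizes (keyS (stepB grid (R : Int) (C : Int)) N s) 0 + 1)

def INVP (grid : List String) (R C N : Nat) (P reps : List (Int × Int × Int))
    (seen : PySem.Set (Int × Int × Int)) (ans : List Int)
    (dict : PySem.Dict (Int × Int × Int) Int) : Prop :=
  (∀ t ∈ reps, InR R C t) ∧
  reps.Pairwise (fun a b => ¬ OrbS (stepB grid (R : Int) (C : Int)) a b ∧
    ¬ OrbS (stepB grid (R : Int) (C : Int)) b a) ∧
  ans = reps.map (fun t => (perS (stepB grid (R : Int) (C : Int)) N t : Int)) ∧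
  dict.items = reps.map (fun t => (keyS (stepB grid (R : Int) (C : Int)) N t,
    (P.countP (fun u => decide (u ∈ orbL (stepB grid (R : Int) (C : Int)) N t)) : Int))) ∧
  (∀ x, InR R C x → (PySem.Set.contains seen x = true ↔
      ∃ t ∈ reps, OrbS (stepB grid (R : Int) (C : Int)) t x)) ∧
  (∀ u ∈ P, ∃ t ∈ reps, OrbS (stepB grid (R : Int) (C : Int)) t u)

theorem orb_bounded (f : (Int × Int × Int) → (Int × Int × Int)) (N : Nat)
    (s x : Int × Int × Int) (hex : ∃ k, k < N + 1 ∧ 0 < k ∧ f^[k] s = s) :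
    OrbS f s x ↔ ∃ k, 0 < k ∧ k ≤ perS f N s ∧ f^[k] s = x := by
  have hp := perS_spec f N s hex
  constructor
  · rintro ⟨k, hk⟩
    by_cases h0 : k % perS f N s = 0
    · refine ⟨perS f N s, hp.1, le_refl _, ?_⟩
      rw [hp.2.2, ← hk, iter_mod f N s hex k, h0]
      rfl
    · refine ⟨k % perS f N s, by omega, by have := Nat.mod_lt k hp.1; omega, ?_⟩
      rw [← iter_mod f N s hex k, hk]
  · rintro ⟨k, _, _, hk⟩
    exact ⟨k, hk⟩

theorem orb_iff_of_orb (f : (Int × Int × Int) → (Int × Int × Int)) (R C N : Nat)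
    (hf : PVPerm f R C)
    (hexAll : ∀ s, InR R C s → ∃ k, k < N + 1 ∧ 0 < k ∧ f^[k] s = s)
    (t t' : Int × Int × Int) (ht : InR R C t) (ht' : InR R C t') (h : OrbS f t t') :
    ∀ u, (OrbS f t u ↔ OrbS f t' u) := by
  intro u
  constructor
  · intro h2
    exact OrbS_trans f t' t u (OrbS_symm f R C N hf hexAll t t' ht h) h2
  · intro h2
    exact OrbS_trans f t t' u h h2

theorem main_inv (grid : List String) (hPre : Pre_solution grid) (R C N : Nat)
    (hR : R = grid.length) (hC : C = (grid.head?.getD "").length) (hN : N = 4 * R * C) :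
    ∀ (rest P reps : List (Int × Int × Int)) (seen : PySem.Set (Int × Int × Int))
      (ans : List Int) (dict : PySem.Dict (Int × Int × Int) Int),
      (∀ s ∈ rest, InR R C s) →
      INVP grid R C N P reps seen ans dict →
      ∃ reps',
        INVP grid R C N (P ++ rest) reps'
          (rest.foldl (astepF grid R C (N + 1)) (seen, ans)).1
          (rest.foldl (astepF grid R C (N + 1)) (seen, ans)).2
          (rest.foldl (dstepF grid R C N) dict) := by
  have hf := stepB_perm grid hPre R C hR hC
  have hexAll : ∀ s, InR R C s →
      ∃ k, k < N + 1 ∧ 0 < k ∧ (stepB grid (R : Int) (C : Int))^[k] s = s := by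
    rw [hN]
    exact stepB_hexAll grid hPre R C hR hC
  intro rest
  induction rest with
  | nil =>
    intro P reps seen ans dict _ hinv
    exact ⟨reps, by simpa using hinv⟩
  | cons s rest ih =>
    intro P reps seen ans dict hrest hinv
    obtain ⟨hreps, hpair, hans, hitems, hseen, hcov⟩ := hinv
    have hsIn : InR R C s := hrest s List.mem_cons_self
    have hdisj : ∀ x ∈ reps, ∀ y ∈ reps, x ≠ y →
        ¬ OrbS (stepB grid (R : Int) (C : Int)) x y := by
      intro x hx y hy hne
      exact (hpair.forall (by intro x y hab; exact ⟨hab.2, hab.1⟩) hx hy hne).1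
    have hkeysN : (reps.map (keyS (stepB grid (R : Int) (C : Int)) N)).Nodup := by
      have hrepsN : reps.Nodup :=
        hpair.imp (fun h => fun he => h.1 (he ▸ OrbS_refl _ _))
      rw [List.nodup_map_iff_inj_on hrepsN]
      intro x hx y hy hxy
      by_contra hne
      exact hdisj x hx y hy hne
        (keyS_eq_orb _ R C N hf hexAll x y (hreps x hx) (hreps y hy) hxy)
    have hdkeys : dict.keys = reps.map (keyS (stepB grid (R : Int) (C : Int)) N) := by
      show dict.items.map (·.1) = _
      rw [hitems, List.map_map]
      rfl
    have hdkN : dict.keys.Nodup := by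
      rw [hdkeys]
      exact hkeysN
    rw [List.foldl_cons, List.foldl_cons]
    by_cases hc : PySem.Set.contains seen s = true
    · -- s's orbit is already represented: A skips, B increments the existing tally
      obtain ⟨t, htm, hts⟩ := (hseen s hsIn).mp hc
      have htIn := hreps t htm
      have hkey : keyS (stepB grid (R : Int) (C : Int)) N s
          = keyS (stepB grid (R : Int) (C : Int)) N t :=
        (keyS_congr _ R C N hf hexAll t s htIn hts).symm
      have hA : astepF grid R C (N + 1) (seen, ans) s = (seen, ans) := by
        unfold astepF
        rw [if_pos hc]
      have hcont : dict.contains (keyS (stepB grid (R : Int) (C : Int)) N s) = true := by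
        rw [PySem.Dict.contains_iff_mem_keys, hdkeys, hkey]
        exact List.mem_map_of_mem htm
      have hgetD : dict.getD (keyS (stepB grid (R : Int) (C : Int)) N s) 0
          = (P.countP (fun u =>
              decide (u ∈ orbL (stepB grid (R : Int) (C : Int)) N t)) : Int) := by
        rw [hkey]
        exact PySem.Dict.getD_of_mem_items dict
          (by rw [hitems]; exact List.mem_map_of_mem htm) hdkN 0
      have hDitems : (dstepF grid R C N dict s).items
          = reps.map (fun t' => (keyS (stepB grid (R : Int) (C : Int)) N t',
              ((P ++ [s]).countP (fun u =>
                decide (u ∈ orbL (stepB grid (R : Int) (C : Int)) N t')) : Int))) := by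
        unfold dstepF
        rw [PySem.Dict.items_insert_of_contains dict _ hcont, hitems, List.map_map]
        apply List.map_congr_left
        intro t' ht'
        have ht'In := hreps t' ht'
        show (if ((keyS (stepB grid (R : Int) (C : Int)) N t' == keyS (stepB grid (R : Int) (C : Int)) N s)) = true
            then _ else _) = _
        by_cases hkk : keyS (stepB grid (R : Int) (C : Int)) N t'
            = keyS (stepB grid (R : Int) (C : Int)) N s
        · have horb : OrbS (stepB grid (R : Int) (C : Int)) t' s :=
            keyS_eq_orb _ R C N hf hexAll t' s ht'In hsIn hkk
          have horbtt : OrbS (stepB grid (R : Int) (C : Int)) t' t :=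
            OrbS_trans _ t' s t horb (OrbS_symm _ R C N hf hexAll t s htIn hts)
          have hcnt : P.countP (fun u =>
                decide (u ∈ orbL (stepB grid (R : Int) (C : Int)) N t'))
              = P.countP (fun u =>
                decide (u ∈ orbL (stepB grid (R : Int) (C : Int)) N t)) := by
            apply List.countP_congr
            intro u _
            have := orb_iff_of_orb _ R C N hf hexAll t' t ht'In htIn horbtt u
            rw [decide_eq_true_eq, decide_eq_true_eq, mem_orbL _ N t' u (hexAll t' ht'In),
              mem_orbL _ N t u (hexAll t htIn)]
            exact this
          rw [if_pos (by rw [beq_iff_eq]; exact hkk)]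
          rw [Prod.mk.injEq]
          refine ⟨hkk.symm, ?_⟩
          rw [hgetD, List.countP_append, ← hcnt]
          have hone : ([s].countP (fun u =>
              decide (u ∈ orbL (stepB grid (R : Int) (C : Int)) N t'))) = 1 := by
            simp only [List.countP_cons, List.countP_nil]
            rw [if_pos]
            rw [decide_eq_true_eq, mem_orbL _ N t' s (hexAll t' ht'In)]
            exact horb
          rw [hone]
          push_cast
          ring
        · rw [if_neg (by rw [beq_iff_eq]; exact hkk)]
          rw [Prod.mk.injEq]
          refine ⟨rfl, ?_⟩
          have hzero : ([s].countP (fun u =>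
              decide (u ∈ orbL (stepB grid (R : Int) (C : Int)) N t'))) = 0 := by
            simp only [List.countP_cons, List.countP_nil]
            rw [if_neg]
            rw [decide_eq_true_eq, mem_orbL _ N t' s (hexAll t' ht'In)]
            intro horb
            exact hkk (keyS_congr _ R C N hf hexAll t' s ht'In horb)
          rw [List.countP_append, hzero]
          simp
      rw [hA]
      have hinv' : INVP grid R C N (P ++ [s]) reps seen ans (dstepF grid R C N dict s) := by
        refine ⟨hreps, hpair, hans, hDitems, hseen, ?_⟩
        intro u hu
        rcases List.mem_append.mp hu with hu | hu
        · exact hcov u hu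
        · rw [List.mem_singleton.mp hu]
          exact ⟨t, htm, hts⟩
      obtain ⟨reps', h'⟩ := ih (P ++ [s]) reps seen ans (dstepF grid R C N dict s)
        (fun u hu => hrest u (List.mem_cons_of_mem _ hu)) hinv'
      refine ⟨reps', ?_⟩
      rw [show P ++ s :: rest = (P ++ [s]) ++ rest by simp]
      exact h'
    · -- a fresh orbit: A walks it, B opens a new tally at its key
      rw [Bool.not_eq_true] at hc
      have hex := hexAll s hsIn
      have hp := perS_spec (stepB grid (R : Int) (C : Int)) N s hex
      have hnotrep : ∀ t ∈ reps, ¬ OrbS (stepB grid (R : Int) (C : Int)) t s := by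
        intro t htm horb
        rw [(hseen s hsIn).mpr ⟨t, htm, horb⟩] at hc
        cases hc
      have hw := walkB_run grid R C N s hex (N + 1) 0 seen hp.1 (by omega)
      simp only [Function.iterate_zero_apply, Nat.cast_zero] at hw
      have hA : astepF grid R C (N + 1) (seen, ans) s
          = ((walkB grid (R : Int) (C : Int) s s 0 seen (N + 1)).2,
             ans ++ [(walkB grid (R : Int) (C : Int) s s 0 seen (N + 1)).1]) := by
        unfold astepF
        rw [if_neg (by rw [hc]; exact Bool.false_ne_true)]
      have hwseen : ∀ x, PySem.Set.contains
            (walkB grid (R : Int) (C : Int) s s 0 seen (N + 1)).2 x = true ↔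
          (PySem.Set.contains seen x = true ∨ OrbS (stepB grid (R : Int) (C : Int)) s x) := by
        intro x
        rw [hw.2 x, orb_bounded _ N s x hex]
      have hcont : dict.contains (keyS (stepB grid (R : Int) (C : Int)) N s) = false := by
        rw [← Bool.not_eq_true, PySem.Dict.contains_iff_mem_keys, hdkeys]
        intro hmem
        rw [List.mem_map] at hmem
        obtain ⟨t, htm, hkt⟩ := hmem
        exact hnotrep t htm
          (keyS_eq_orb _ R C N hf hexAll t s (hreps t htm) hsIn hkt)
      have hDitems : (dstepF grid R C N dict s).items
          = dict.items ++ [(keyS (stepB grid (R : Int) (C : Int)) N s, 1)] := by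
        unfold dstepF
        rw [PySem.Dict.items_insert_of_not_contains dict _ hcont,
          PySem.Dict.getD_of_not_contains dict _ hcont]
        norm_num
      have hcntP0 : P.countP (fun u =>
          decide (u ∈ orbL (stepB grid (R : Int) (C : Int)) N s)) = 0 := by
        rw [List.countP_eq_zero]
        intro u hu
        rw [decide_eq_true_eq, mem_orbL _ N s u hex]
        intro horb
        obtain ⟨t, htm, htu⟩ := hcov u hu
        exact hnotrep t htm (OrbS_trans _ t u s htu (OrbS_symm _ R C N hf hexAll s u hsIn horb))
      have hfresh : ∀ t' ∈ reps,
          (P ++ [s]).countP (fun u =>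
              decide (u ∈ orbL (stepB grid (R : Int) (C : Int)) N t'))
            = P.countP (fun u =>
              decide (u ∈ orbL (stepB grid (R : Int) (C : Int)) N t')) := by
        intro t' ht'
        rw [List.countP_append]
        have hzero : ([s].countP (fun u =>
            decide (u ∈ orbL (stepB grid (R : Int) (C : Int)) N t'))) = 0 := by
          simp only [List.countP_cons, List.countP_nil]
          rw [if_neg]
          rw [decide_eq_true_eq, mem_orbL _ N t' s (hexAll t' (hreps t' ht'))]
          exact hnotrep t' ht'
        rw [hzero]
        simp
      have hinv' : INVP grid R C N (P ++ [s]) (reps ++ [s])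
          (walkB grid (R : Int) (C : Int) s s 0 seen (N + 1)).2
          (ans ++ [(walkB grid (R : Int) (C : Int) s s 0 seen (N + 1)).1])
          (dstepF grid R C N dict s) := by
        refine ⟨?_, ?_, ?_, ?_, ?_, ?_⟩
        · intro t htm
          rcases List.mem_append.mp htm with h | h
          · exact hreps t h
          · rw [List.mem_singleton.mp h]
            exact hsIn
        · rw [List.pairwise_append]
          refine ⟨hpair, List.pairwise_singleton _ _, ?_⟩
          intro t htm x hx
          rw [List.mem_singleton.mp hx]
          refine ⟨hnotrep t htm, ?_⟩
          intro horb
          exact hnotrep t htm (OrbS_symm _ R C N hf hexAll s t hsIn horb)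
        · rw [List.map_append, ← hans, hw.1]
          rfl
        · rw [hDitems, hitems, List.map_append]
          congr 1
          · apply List.map_congr_left
            intro t' ht'
            rw [Prod.mk.injEq]
            exact ⟨rfl, by rw [hfresh t' ht']⟩
          · simp only [List.map_cons, List.map_nil]
            have hone : ([s].countP (fun u =>
                decide (u ∈ orbL (stepB grid (R : Int) (C : Int)) N s))) = 1 := by
              simp only [List.countP_cons, List.countP_nil]
              rw [if_pos]
              rw [decide_eq_true_eq, mem_orbL _ N s s hex]
              exact OrbS_refl _ s
            rw [List.countP_append, hcntP0, hone]
            norm_num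
        · intro x hxIn
          rw [hwseen x]
          constructor
          · rintro (h | h)
            · obtain ⟨t, htm, htx⟩ := (hseen x hxIn).mp h
              exact ⟨t, List.mem_append.mpr (Or.inl htm), htx⟩
            · exact ⟨s, List.mem_append.mpr (Or.inr (List.mem_singleton.mpr rfl)), h⟩
          · rintro ⟨t, htm, htx⟩
            rcases List.mem_append.mp htm with h | h
            · exact Or.inl ((hseen x hxIn).mpr ⟨t, h, htx⟩)
            · rw [List.mem_singleton.mp h] at htx
              exact Or.inr htx
        · intro u hu
          rcases List.mem_append.mp hu with h | h
          · obtain ⟨t, htm, htu⟩ := hcov u h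
            exact ⟨t, List.mem_append.mpr (Or.inl htm), htu⟩
          · rw [List.mem_singleton.mp h]
            exact ⟨s, List.mem_append.mpr (Or.inr (List.mem_singleton.mpr rfl)),
              OrbS_refl _ s⟩
      rw [hA]
      obtain ⟨reps', h'⟩ := ih (P ++ [s]) (reps ++ [s])
        (walkB grid (R : Int) (C : Int) s s 0 seen (N + 1)).2
        (ans ++ [(walkB grid (R : Int) (C : Int) s s 0 seen (N + 1)).1])
        (dstepF grid R C N dict s)
        (fun u hu => hrest u (List.mem_cons_of_mem _ hu)) hinv'
      refine ⟨reps', ?_⟩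
      rw [show P ++ s :: rest = (P ++ [s]) ++ rest by simp]
      exact h'



-- ---------- Part 9: both programs are folds of astepF / dstepF over the enumeration ----------

theorem Afold_conv (grid : List String) (R C : Nat) (fuel : Nat)
    (st0 : PySem.Set (Int × Int × Int) × List Int) :
    (PySem.List.pyRange 0 (R : Int) 1).foldl (BfunR grid (R : Int) (C : Int) fuel) st0
      = (Elist R C).foldl (astepF grid R C fuel) st0 := by
  rw [Elist, List.foldl_flatMap]
  apply List.foldl_ext
  intro st r _
  show BfunR grid (R : Int) (C : Int) fuel st r = _
  rw [List.foldl_flatMap]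
  unfold BfunR
  apply List.foldl_ext
  intro st' c _
  show BfunC grid (R : Int) (C : Int) fuel r st' c = _
  rw [List.foldl_map]
  unfold BfunC
  apply List.foldl_ext
  intro st'' d _
  rfl

theorem portstep_eq (grid : List String) (sizes : PySem.Dict (Int × Int × Int) Int)
    (d r c : Int) :
    PySem.Dict.insert sizes
      (((PySem.List.pyRange 0
            (4 * (grid.length : Int) * ((PySem.List.pyGetD grid 0 "").length : Int)) 1).foldl
          (fun (p : (Int × Int × Int) × (Int × Int × Int)) _ =>
            (stepB grid (grid.length : Int) ((PySem.List.pyGetD grid 0 "").length : Int) p.1,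
             pymin p.2 (stepB grid (grid.length : Int)
               ((PySem.List.pyGetD grid 0 "").length : Int) p.1)))
          ((d, r, c), (d, r, c))).2)
      (PySem.Dict.getD sizes
        (((PySem.List.pyRange 0
            (4 * (grid.length : Int) * ((PySem.List.pyGetD grid 0 "").length : Int)) 1).foldl
          (fun (p : (Int × Int × Int) × (Int × Int × Int)) _ =>
            (stepB grid (grid.length : Int) ((PySem.List.pyGetD grid 0 "").length : Int) p.1,
             pymin p.2 (stepB grid (grid.length : Int)
               ((PySem.List.pyGetD grid 0 "").length : Int) p.1)))
          ((d, r, c), (d, r, c))).2) 0 + 1)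
    = dstepF grid grid.length (PySem.List.pyGetD grid 0 "").length
        (4 * grid.length * (PySem.List.pyGetD grid 0 "").length) sizes (d, r, c) := by
  have hfold : (PySem.List.pyRange 0
          (4 * (grid.length : Int) * ((PySem.List.pyGetD grid 0 "").length : Int)) 1).foldl
        (fun (p : (Int × Int × Int) × (Int × Int × Int)) _ =>
          (stepB grid (grid.length : Int) ((PySem.List.pyGetD grid 0 "").length : Int) p.1,
           pymin p.2 (stepB grid (grid.length : Int)
             ((PySem.List.pyGetD grid 0 "").length : Int) p.1)))
        ((d, r, c), (d, r, c))
      = ((stepB grid (grid.length : Int) ((PySem.List.pyGetD grid 0 "").length : Int))^[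
            4 * grid.length * (PySem.List.pyGetD grid 0 "").length] (d, r, c),
         keyS (stepB grid (grid.length : Int) ((PySem.List.pyGetD grid 0 "").length : Int))
           (4 * grid.length * (PySem.List.pyGetD grid 0 "").length) (d, r, c)) := by
    rw [show (4 * (grid.length : Int) * ((PySem.List.pyGetD grid 0 "").length : Int))
        = ((4 * grid.length * (PySem.List.pyGetD grid 0 "").length : Nat) : Int) by
      push_cast; ring]
    rw [PySem.List.pyRange_zero_natCast, List.foldl_map]
    rw [List.foldl_ext _
      (fun (p : (Int × Int × Int) × (Int × Int × Int)) (_ : Nat) =>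
        (stepB grid (grid.length : Int) ((PySem.List.pyGetD grid 0 "").length : Int) p.1,
         pymin p.2 (stepB grid (grid.length : Int)
           ((PySem.List.pyGetD grid 0 "").length : Int) p.1)))
      ((d, r, c), (d, r, c)) (fun a b _ => rfl)]
    exact fold_iter_min grid (grid.length : Int) ((PySem.List.pyGetD grid 0 "").length : Int)
      (d, r, c) (4 * grid.length * (PySem.List.pyGetD grid 0 "").length)
  rw [hfold]
  rfl

theorem Bfold_conv (grid : List String) :
    solution_alt grid = PySem.List.sorted (PySem.Dict.values
      ((Elist grid.length (PySem.List.pyGetD grid 0 "").length).foldl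
        (dstepF grid grid.length (PySem.List.pyGetD grid 0 "").length
          (4 * grid.length * (PySem.List.pyGetD grid 0 "").length)) PySem.Dict.empty))
      (fun x => x) false := by
  have h1 : (PySem.List.pyRange 0 (grid.length : Int) 1).foldl (fun sizes r =>
        (PySem.List.pyRange 0 ((PySem.List.pyGetD grid 0 "").length : Int) 1).foldl (fun sizes c =>
          (PySem.List.pyRange 0 4 1).foldl
            (fun (sizes : PySem.Dict (Int × Int × Int) Int) d =>
              let start := (d, r, c)
              let rc := (PySem.List.pyRange 0
                  (4 * (grid.length : Int) * ((PySem.List.pyGetD grid 0 "").length : Int)) 1).foldl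
                (fun (p : (Int × Int × Int) × (Int × Int × Int)) _ =>
                  let cur := stepB grid (grid.length : Int)
                    ((PySem.List.pyGetD grid 0 "").length : Int) p.1
                  (cur, pymin p.2 cur)) (start, start)
              PySem.Dict.insert sizes rc.2 (PySem.Dict.getD sizes rc.2 0 + 1)) sizes) sizes)
        PySem.Dict.empty
      = (Elist grid.length (PySem.List.pyGetD grid 0 "").length).foldl
          (dstepF grid grid.length (PySem.List.pyGetD grid 0 "").length
            (4 * grid.length * (PySem.List.pyGetD grid 0 "").length)) PySem.Dict.empty := by
    rw [Elist, List.foldl_flatMap]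
    apply List.foldl_ext
    intro sizes r _
    rw [List.foldl_flatMap]
    apply List.foldl_ext
    intro sizes' c _
    rw [List.foldl_map]
    apply List.foldl_ext
    intro sizes'' d _
    exact portstep_eq grid sizes'' d r c
  show PySem.List.sorted (PySem.Dict.values ((PySem.List.pyRange 0 (grid.length : Int) 1).foldl
      (fun sizes r =>
        (PySem.List.pyRange 0 ((PySem.List.pyGetD grid 0 "").length : Int) 1).foldl (fun sizes c =>
          (PySem.List.pyRange 0 4 1).foldl
            (fun (sizes : PySem.Dict (Int × Int × Int) Int) d =>
              let start := (d, r, c)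
              let rc := (PySem.List.pyRange 0
                  (4 * (grid.length : Int) * ((PySem.List.pyGetD grid 0 "").length : Int)) 1).foldl
                (fun (p : (Int × Int × Int) × (Int × Int × Int)) _ =>
                  let cur := stepB grid (grid.length : Int)
                    ((PySem.List.pyGetD grid 0 "").length : Int) p.1
                  (cur, pymin p.2 cur)) (start, start)
              PySem.Dict.insert sizes rc.2 (PySem.Dict.getD sizes rc.2 0 + 1)) sizes) sizes)
      PySem.Dict.empty)) (fun x => x) false = _
  rw [h1]

-- ---------- Part 10: assembly ----------

theorem solution_eq_alt (grid : List String) (hPre : Pre_solution grid) :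
    solution grid = solution_alt grid := by
  have hCeq : (PySem.List.pyGetD grid 0 "").length = (grid.head?.getD "").length := by
    rw [len0_eq]
  have hf := stepB_perm grid hPre grid.length (PySem.List.pyGetD grid 0 "").length rfl hCeq
  have hexAll : ∀ s, InR grid.length (PySem.List.pyGetD grid 0 "").length s →
      ∃ k, k < 4 * grid.length * (PySem.List.pyGetD grid 0 "").length + 1 ∧ 0 < k ∧
        (stepB grid (grid.length : Int)
          ((PySem.List.pyGetD grid 0 "").length : Int))^[k] s = s :=
    stepB_hexAll grid hPre grid.length (PySem.List.pyGetD grid 0 "").length rfl hCeq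
  have hinv0 : INVP grid grid.length (PySem.List.pyGetD grid 0 "").length
      (4 * grid.length * (PySem.List.pyGetD grid 0 "").length) [] [] PySem.Set.empty []
      PySem.Dict.empty := by
    refine ⟨by simp, List.Pairwise.nil, rfl, rfl, ?_, by simp⟩
    intro x _
    constructor
    · intro h
      rw [PySem.Set.contains_iff] at h
      exact absurd h (List.not_mem_nil)
    · rintro ⟨t, ht, _⟩
      exact absurd ht (List.not_mem_nil)
  obtain ⟨reps', hres⟩ := main_inv grid hPre grid.length (PySem.List.pyGetD grid 0 "").length
      (4 * grid.length * (PySem.List.pyGetD grid 0 "").length) rfl hCeq rfl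
      (Elist grid.length (PySem.List.pyGetD grid 0 "").length) [] [] PySem.Set.empty []
      PySem.Dict.empty (fun s hs => (mem_Elist _ _ s).mp hs) hinv0
  obtain ⟨hreps', hpair', hans', hitems', hseen', hcov'⟩ := hres
  rw [List.nil_append] at hitems'
  have hvals : PySem.Dict.values
      ((Elist grid.length (PySem.List.pyGetD grid 0 "").length).foldl
        (dstepF grid grid.length (PySem.List.pyGetD grid 0 "").length
          (4 * grid.length * (PySem.List.pyGetD grid 0 "").length)) PySem.Dict.empty)
      = reps'.map (fun t =>
          (((Elist grid.length (PySem.List.pyGetD grid 0 "").length).countP (fun u =>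
            decide (u ∈ orbL (stepB grid (grid.length : Int)
              ((PySem.List.pyGetD grid 0 "").length : Int))
              (4 * grid.length * (PySem.List.pyGetD grid 0 "").length) t))) : Int)) := by
    show ((Elist grid.length (PySem.List.pyGetD grid 0 "").length).foldl
        (dstepF grid grid.length (PySem.List.pyGetD grid 0 "").length
          (4 * grid.length * (PySem.List.pyGetD grid 0 "").length))
        PySem.Dict.empty).items.map (·.2) = _
    rw [hitems', List.map_map]
    apply List.map_congr_left
    intro t _
    rfl
  rw [solution_eq_walkfold grid hPre, Bfold_conv grid]
  rw [show aFuel grid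
      = 4 * grid.length * (PySem.List.pyGetD grid 0 "").length + 1 from rfl]
  rw [Afold_conv grid grid.length (PySem.List.pyGetD grid 0 "").length
    (4 * grid.length * (PySem.List.pyGetD grid 0 "").length + 1) (PySem.Set.empty, [])]
  rw [hvals, hans']
  congr 1
  apply List.map_congr_left
  intro t ht
  rw [countP_Elist (stepB grid (grid.length : Int)
      ((PySem.List.pyGetD grid 0 "").length : Int)) grid.length
    (PySem.List.pyGetD grid 0 "").length
    (4 * grid.length * (PySem.List.pyGetD grid 0 "").length) hf hexAll t (hreps' t ht)]


-- ===== VERDICT (by name: the statement is the Claim_ definition above) =====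
theorem solution_spec : Claim_equal_solution := by
  intro grid _hDom hPre
  unfold Spec_solution
  exact solution_eq_alt grid hPre
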